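-- pv_equiv track=rewrite | github.com/jjoshua2/arc_agi | unsolved/2025-10-11T21-09-39Z/83302e8f_best1.py | transform
-- ===== SOURCE A (Python) =====
-- from collections import deque, Counter
--
-- def transform(grid: list[list[int]]) -> list[list[int]]:
--     if not grid or not grid[0]:
--         return grid
--     h = len(grid)
--     w = len(grid[0])
--
--     # Count colors; choose the barrier color as the most frequent non-zero color
--     counts = Counter()
--     for r in range(h):
--         for c in range(w):
--             counts[grid[r][c]] += 1
--
--     # Exclude background 0 when selecting barrier; if all are 0, nothing to do
--     candidates = [(col, cnt) for col, cnt in counts.items() if col != 0]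
--     if not candidates:
--         return [row[:] for row in grid]
--
--     # Choose the most frequent non-zero color as barrier
--     barrier_color = max(candidates, key=lambda x: x[1])[0]
--
--     # Find connected components of cells that are NOT barrier_color (4-connectivity)
--     visited = [[False]*w for _ in range(h)]
--     comp_id = [[-1]*w for _ in range(h)]
--     comps = {}  # id -> dict with size, minr, minc, cells list optional
--     drs = [(-1,0),(1,0),(0,-1),(0,1)]
--     next_id = 0
--
--     for r in range(h):
--         for c in range(w):
--             if grid[r][c] == barrier_color or visited[r][c]:
--                 continue
--             # BFS for this component
--             q = deque()
--             q.append((r,c))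
--             visited[r][c] = True
--             comp_id[r][c] = next_id
--             size = 0
--             minr = r
--             minc = c
--             while q:
--                 cr, cc = q.popleft()
--                 size += 1
--                 if cr < minr: minr = cr
--                 if cc < minc: minc = cc
--                 for dr, dc in drs:
--                     nr = cr + dr
--                     nc = cc + dc
--                     if 0 <= nr < h and 0 <= nc < w and not visited[nr][nc] and grid[nr][nc] != barrier_color:
--                         visited[nr][nc] = True
--                         comp_id[nr][nc] = next_id
--                         q.append((nr,nc))
--             comps[next_id] = (size, minr, minc)
--             next_id += 1
--
--     # If there are no components (everything is barrier), return original
--     if not comps: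
--         return [row[:] for row in grid]
--
--     # Choose largest component; tie-break by smaller minr then smaller minc
--     # We will maximize (size, -minr, -minc) so that larger size chosen; if tie choose smallest minr/minc
--     best_id = max(comps.items(), key=lambda it: (it[1][0], -it[1][1], -it[1][2]))[0]
--
--     # Build output: barrier cells unchanged; cells in best comp -> 4, others -> 3
--     out = [[None]*w for _ in range(h)]
--     for r in range(h):
--         for c in range(w):
--             if grid[r][c] == barrier_color:
--                 out[r][c] = grid[r][c]
--             else:
--                 cid = comp_id[r][c]
--                 if cid == best_id:
--                     out[r][c] = 4
--                 else:
--                     out[r][c] = 3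
--
--     return out
-- ===== SOURCE B (Python) =====
-- from collections import Counter
--
--
-- def transform(grid: list[list[int]]) -> list[list[int]]:
--     if not grid or not grid[0]:
--         return grid
--     h = len(grid)
--     w = len(grid[0])
--
--     # Count colors of the h*w window in one flattened pass
--     counts = Counter(v for row in grid for v in row[:w])
--
--     # Barrier = first-seen most frequent non-zero color (single-pass fold)
--     barrier = None
--     best_cnt = -1
--     for col, cnt in counts.items():
--         if col != 0 and cnt > best_cnt:
--             barrier, best_cnt = col, cnt
--     if barrier is None:
--         return [row[:] for row in grid]
--
--     n = h * w
--     # Min-label propagation: lab[i] = smallest row-major index reachable from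
--     # cell i through non-barrier cells; -1 marks barrier cells.  Iterate the
--     # pure relaxation step to its fixpoint (no queue, stack or visited matrix).
--     lab = [(-1 if grid[i // w][i % w] == barrier else i) for i in range(n)]
--     while True:
--         new = [_relax(lab, i, h, w) for i in range(n)]
--         if new == lab:
--             break
--         lab = new
--
--     if all(x < 0 for x in lab):
--         return [row[:] for row in grid]
--
--     # Aggregate (size, minr, minc) per component label, keys in first-seen
--     # (= increasing label) order
--     stats = {}
--     for i in range(n):
--         if lab[i] < 0:
--             continue
--         r, c = divmod(i, w)
--         s = stats.get(lab[i])
--         if s is None: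
--             stats[lab[i]] = (1, r, c)
--         else:
--             stats[lab[i]] = (s[0] + 1, s[1] if s[1] < r else r, s[2] if s[2] < c else c)
--
--     best_lab = None
--     best_key = None
--     for lb, (sz, mr, mc) in stats.items():
--         key = (sz, -mr, -mc)
--         if best_key is None or key > best_key:
--             best_lab, best_key = lb, key
--
--     return [[grid[r][c] if grid[r][c] == barrier else (4 if lab[r * w + c] == best_lab else 3)
--              for c in range(w)] for r in range(h)]
--
--
-- def _relax(lab, i, h, w):
--     m = lab[i]
--     if m < 0:
--         return m
--     r = i // w
--     c = i % w
--     if r > 0 and 0 <= lab[i - w] < m: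
--         m = lab[i - w]
--     if r + 1 < h and 0 <= lab[i + w] < m:
--         m = lab[i + w]
--     if c > 0 and 0 <= lab[i - 1] < m:
--         m = lab[i - 1]
--     if c + 1 < w and 0 <= lab[i + 1] < m:
--         m = lab[i + 1]
--     return m
-- ===== Notes on version B (the rewrite author's own statement) =====
-- stated objective: alternative
-- what changed: The BFS flood fill with a deque, visited matrix and comp_id matrix is replaced by fixpoint min-label propagation: every non-barrier cell starts labelled with its own row-major index and a pure relaxation step (take the minimum label among the cell and its non-barrier neighbours) is iterated until it stabilises, so a component is identified by the smallest row-major index it contains; per-label aggregation then yields size/minr/minc and the recoloring.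
import Mathlib
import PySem

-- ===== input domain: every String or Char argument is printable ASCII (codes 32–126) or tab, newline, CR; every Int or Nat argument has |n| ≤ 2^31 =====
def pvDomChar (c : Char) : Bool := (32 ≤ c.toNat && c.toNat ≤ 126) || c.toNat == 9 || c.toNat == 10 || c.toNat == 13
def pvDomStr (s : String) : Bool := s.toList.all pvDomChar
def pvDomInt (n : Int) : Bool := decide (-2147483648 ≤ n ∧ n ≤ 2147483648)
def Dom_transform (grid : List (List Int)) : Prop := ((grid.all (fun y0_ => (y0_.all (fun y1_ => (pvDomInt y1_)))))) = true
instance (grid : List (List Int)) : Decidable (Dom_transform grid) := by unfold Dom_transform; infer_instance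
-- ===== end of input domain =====

-- B replaces A's BFS flood fill (deque + visited + comp_id matrices) by fixpoint
-- min-label propagation: each non-barrier cell starts labelled with its own
-- row-major index and a pure relaxation step is iterated until stable, so a
-- component is identified by the smallest row-major index it contains.
-- Objective: alternative (a different algorithm, not claimed faster).

-- shared 2-D access helpers (both Pythons index matrices only under
-- 0 ≤ r < h, 0 ≤ c < w guards, where getD with a toNat index is exact)
def cellAt (g : List (List Int)) (r c : Int) : Int := (g.getD r.toNat []).getD c.toNat 0
def vGet (v : List (List Bool)) (r c : Int) : Bool := (v.getD r.toNat []).getD c.toNat false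
def vSet (v : List (List Bool)) (r c : Int) : List (List Bool) :=
  v.set r.toNat ((v.getD r.toNat []).set c.toNat true)
-- Python tuple comparison x > b on triples (lexicographic); used by both ports
def tripleGt (x b : Int × Int × Int) : Bool :=
  decide (b.1 < x.1 ∨ (b.1 = x.1 ∧ (b.2.1 < x.2.1 ∨ (b.2.1 = x.2.1 ∧ b.2.2 < x.2.2))))

-- ===== PORT A =====
def mGet (m : List (List Int)) (r c : Int) : Int := (m.getD r.toNat []).getD c.toNat (-1)
def mSet (m : List (List Int)) (r c x : Int) : List (List Int) :=
  m.set r.toNat ((m.getD r.toNat []).set c.toNat x)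

-- the BFS while-loop; q is the deque (front = head); fuel only for termination, never
-- exhausted on the inputs transform feeds it (proved in the lemmas below)
def bfsLoop (g : List (List Int)) (h w barrier nid : Int) :
    Nat → List (Int × Int) → List (List Bool) → List (List Int) → Int → Int → Int →
    List (List Bool) × List (List Int) × Int × Int × Int
  | 0, _, vis, cid, size, minr, minc => (vis, cid, size, minr, minc)
  | _ + 1, [], vis, cid, size, minr, minc => (vis, cid, size, minr, minc)
  | fuel + 1, (cr, cc) :: rest, vis, cid, size, minr, minc =>
    let size := size + 1
    let minr := if cr < minr then cr else minr
    let minc := if cc < minc then cc else minc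
    let st := [((-1 : Int), (0 : Int)), (1, 0), (0, -1), (0, 1)].foldl
      (fun (st : List (Int × Int) × List (List Bool) × List (List Int)) d =>
        let nr := cr + d.1
        let nc := cc + d.2
        if 0 ≤ nr ∧ nr < h ∧ 0 ≤ nc ∧ nc < w ∧ vGet st.2.1 nr nc = false ∧ cellAt g nr nc ≠ barrier
        then (st.1 ++ [(nr, nc)], vSet st.2.1 nr nc, mSet st.2.2 nr nc nid)
        else st) (rest, vis, cid)
    bfsLoop g h w barrier nid fuel st.1 st.2.1 st.2.2 size minr minc

def aCounts (g : List (List Int)) (h w : Int) : PySem.Dict Int Int :=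
  (PySem.List.pyRange 0 h 1).foldl (fun d r =>
    (PySem.List.pyRange 0 w 1).foldl (fun d c =>
      d.modify (cellAt g r c) 0 (· + 1)) d) PySem.Dict.empty

-- the row-major component scan (the two nested for-loops of A)
def aScan (g : List (List Int)) (h w barrier : Int) :
    List (List Bool) × List (List Int) × List (Int × Int × Int × Int) × Int :=
  (PySem.List.pyRange 0 h 1).foldl (fun st r =>
    (PySem.List.pyRange 0 w 1).foldl
      (fun (st : List (List Bool) × List (List Int) × List (Int × Int × Int × Int) × Int) c =>
        if cellAt g r c = barrier ∨ vGet st.1 r c = true then st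
        else
          let vis := vSet st.1 r c
          let cid := mSet st.2.1 r c st.2.2.2
          let res := bfsLoop g h w barrier st.2.2.2 (h.toNat * w.toNat + 1) [(r, c)] vis cid 0 r c
          (res.1, res.2.1, st.2.2.1 ++ [(st.2.2.2, res.2.2.1, res.2.2.2.1, res.2.2.2.2)],
           st.2.2.2 + 1)) st)
    (List.replicate h.toNat (List.replicate w.toNat false),
     List.replicate h.toNat (List.replicate w.toNat (-1 : Int)),
     ([] : List (Int × Int × Int × Int)), (0 : Int))

def transform (grid : List (List Int)) : List (List Int) :=
  match grid with
  | [] => grid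
  | row0 :: _ =>
    if row0 = [] then grid
    else
      let h : Int := grid.length
      let w : Int := row0.length
      let counts := aCounts grid h w
      let candidates := counts.items.filter (fun p => p.1 ≠ 0)
      match candidates with
      | [] => grid.map (fun row => row)   -- [row[:] for row in grid]: a fresh copy, same value
      | c0 :: cs =>
        let barrier := (cs.foldl (fun best x => if best.2 < x.2 then x else best) c0).1
        let fin := aScan grid h w barrier
        match fin.2.2.1 with
        | [] => grid.map (fun row => row)
        | k0 :: ks =>
          let bestId := (ks.foldl (fun best x =>
            if tripleGt (x.2.1, -x.2.2.1, -x.2.2.2) (best.2.1, -best.2.2.1, -best.2.2.2)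
            then x else best) k0).1
          (PySem.List.pyRange 0 h 1).map (fun r => (PySem.List.pyRange 0 w 1).map (fun c =>
            if cellAt grid r c = barrier then cellAt grid r c
            else if mGet fin.2.1 r c = bestId then 4 else 3))

-- ===== PORT B =====
def bCounts (g : List (List Int)) (w : Int) : PySem.Dict Int Int :=
  g.foldl (fun d row =>
    (row.take w.toNat).foldl (fun (d : PySem.Dict Int Int) v => d.modify v 0 (· + 1)) d)
    PySem.Dict.empty

-- python lab[i], always used with 0 ≤ i < len(lab), where getD is exact
def labGet (lab : List Int) (i : Int) : Int := lab.getD i.toNat (-1)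

-- the helper _relax of Source B
def relax (lab : List Int) (i h w : Int) : Int :=
  let m0 := labGet lab i
  if m0 < 0 then m0
  else
    let r := PySem.Int.floordiv i w
    let c := PySem.Int.mod i w
    let m1 := if 0 < r ∧ 0 ≤ labGet lab (i - w) ∧ labGet lab (i - w) < m0
      then labGet lab (i - w) else m0
    let m2 := if r + 1 < h ∧ 0 ≤ labGet lab (i + w) ∧ labGet lab (i + w) < m1
      then labGet lab (i + w) else m1
    let m3 := if 0 < c ∧ 0 ≤ labGet lab (i - 1) ∧ labGet lab (i - 1) < m2
      then labGet lab (i - 1) else m2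
    let m4 := if c + 1 < w ∧ 0 ≤ labGet lab (i + 1) ∧ labGet lab (i + 1) < m3
      then labGet lab (i + 1) else m3
    m4

-- one relaxation sweep: new = [_relax(lab, i, h, w) for i in range(n)]
def stepL (h w : Int) (lab : List Int) : List Int :=
  (PySem.List.pyRange 0 (h * w) 1).map (fun i => relax lab i h w)

-- the 'while True: … if new == lab: break' loop; python iterates to the fixpoint,
-- which is provably reached within n*n+1 sweeps (lemma iterL_fix below), so the
-- fuel is never exhausted
def iterL (h w : Int) : Nat → List Int → List Int
  | 0, lab => lab
  | fuel + 1, lab =>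
    let new := stepL h w lab
    if new = lab then lab else iterL h w fuel new

def initLab (g : List (List Int)) (w barrier : Int) (n : Int) : List Int :=
  (PySem.List.pyRange 0 n 1).map (fun i =>
    if cellAt g (PySem.Int.floordiv i w) (PySem.Int.mod i w) = barrier then -1 else i)

-- the per-label aggregation dict: label -> (size, minr, minc)
def bStats (h w : Int) (lab : List Int) : PySem.Dict Int (Int × Int × Int) :=
  (PySem.List.pyRange 0 (h * w) 1).foldl
    (fun (st : PySem.Dict Int (Int × Int × Int)) i =>
      let L := labGet lab i
      if L < 0 then st
      else
        let r := PySem.Int.floordiv i w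
        let c := PySem.Int.mod i w
        match st.get? L with
        | none => st.insert L (1, r, c)
        | some s => st.insert L (s.1 + 1, if s.2.1 < r then s.2.1 else r,
            if s.2.2 < c then s.2.2 else c))
    PySem.Dict.empty

-- best label: single-pass fold, first maximal (size, -minr, -minc) wins
def bBest (stats : PySem.Dict Int (Int × Int × Int)) : Option Int × Option (Int × Int × Int) :=
  stats.items.foldl
    (fun (best : Option Int × Option (Int × Int × Int)) p =>
      let key := (p.2.1, -p.2.2.1, -p.2.2.2)
      match best.2 with
      | none => (some p.1, some key)
      | some bk => if tripleGt key bk then (some p.1, some key) else best)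
    (none, none)

def transform_alt (grid : List (List Int)) : List (List Int) :=
  match grid with
  | [] => grid
  | row0 :: _ =>
    if row0 = [] then grid
    else
      let h : Int := grid.length
      let w : Int := row0.length
      let counts := bCounts grid w
      let barrier? := counts.items.foldl
        (fun (best : Option Int × Int) p =>
          if p.1 ≠ 0 ∧ best.2 < p.2 then (some p.1, p.2) else best) (none, -1)
      match barrier?.1 with
      | none => grid.map (fun row => row)
      | some barrier =>
        let lab := iterL h w (h.toNat * w.toNat * (h.toNat * w.toNat) + 1)
          (initLab grid w barrier (h * w))
        if lab.all (fun x => decide (x < 0)) then grid.map (fun row => row)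
        else
          let stats := bStats h w lab
          let bestLab := (bBest stats).1
          -- python 'lab[r*w+c] == best_lab' compares an int with best_lab;
          -- here best_lab is an Option Int, so the comparison lifts the int
          (PySem.List.pyRange 0 h 1).map (fun r => (PySem.List.pyRange 0 w 1).map (fun c =>
            if cellAt grid r c = barrier then cellAt grid r c
            else if some (labGet lab (r * w + c)) = bestLab then 4 else 3))

-- ===== PRECONDITION & SPEC =====
-- Pre_ excludes only ragged grids whose first row is longer than a later row: there A
-- (and B) raise IndexError.
def Pre_transform (grid : List (List Int)) : Prop :=
  ∀ row ∈ grid, (grid.headD []).length ≤ row.length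
instance (grid : List (List Int)) : Decidable (Pre_transform grid) := by
  unfold Pre_transform; infer_instance
def pvWitness_transform : List (List Int) := [[1, 0], [1, 1]]

def Spec_transform (grid : List (List Int)) (out : List (List Int)) : Prop := out = transform_alt grid
instance (grid : List (List Int)) (out : List (List Int)) : Decidable (Spec_transform grid out) := by unfold Spec_transform; infer_instance

-- ===== CLAIM (what is proved, stated in full; the proofs are below) =====
def Claim_equal_transform : Prop := ∀ (grid : List (List Int)), Dom_transform grid → Pre_transform grid → Spec_transform grid (transform grid)

-- ===== LEMMAS AND PROOFS =====

-- ===== proof-side notions =====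
def InB (h w : Int) (p : Int × Int) : Prop := 0 ≤ p.1 ∧ p.1 < h ∧ 0 ≤ p.2 ∧ p.2 < w
def OkC (g : List (List Int)) (h w barrier : Int) (p : Int × Int) : Prop :=
  InB h w p ∧ cellAt g p.1 p.2 ≠ barrier
def AdjC (p q : Int × Int) : Prop :=
  q = (p.1 - 1, p.2) ∨ q = (p.1 + 1, p.2) ∨ q = (p.1, p.2 - 1) ∨ q = (p.1, p.2 + 1)
def StepC (g : List (List Int)) (h w barrier : Int) (p q : Int × Int) : Prop :=
  OkC g h w barrier p ∧ OkC g h w barrier q ∧ AdjC p q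
def ReachC (g : List (List Int)) (h w barrier : Int) : Int × Int → Int × Int → Prop :=
  Relation.ReflTransGen (StepC g h w barrier)
def Dims2 {α : Type} (m : List (List α)) (h w : Int) : Prop :=
  (m.length : Int) = h ∧ ∀ row ∈ m, (row.length : Int) = w
def countFalse (v : List (List Bool)) : Nat := (v.map (fun row => row.count false)).sum

theorem adjC_symm {p q : Int × Int} (hpq : AdjC p q) : AdjC q p := by
  obtain ⟨a, b⟩ := p; obtain ⟨c, d⟩ := q
  simp only [AdjC, Prod.mk.injEq] at *; omega

theorem stepC_symm {g : List (List Int)} {h w barrier : Int} {p q : Int × Int}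
    (hs : StepC g h w barrier p q) : StepC g h w barrier q p :=
  ⟨hs.2.1, hs.1, adjC_symm hs.2.2⟩

theorem reachC_symm {g : List (List Int)} {h w barrier : Int} {p q : Int × Int}
    (hs : ReachC g h w barrier p q) : ReachC g h w barrier q p :=
  Relation.ReflTransGen.symmetric (fun _ _ => stepC_symm) hs

theorem reachC_ok {g : List (List Int)} {h w barrier : Int} {p q : Int × Int}
    (hr : ReachC g h w barrier p q) (hne : p ≠ q) : OkC g h w barrier q := by
  induction hr with
  | refl => exact absurd rfl hne
  | tail _ hstep _ => exact hstep.2.1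

theorem dims2_replicate {α : Type} {h w : Int} (hh : 0 ≤ h) (hw : 0 ≤ w) (x : α) :
    Dims2 (List.replicate h.toNat (List.replicate w.toNat x)) h w := by
  constructor
  · simp; omega
  · intro row hrow
    rw [List.eq_of_mem_replicate hrow]; simp; omega

theorem getD_replicate {α : Type} {n : Nat} {x d : α} {i : Nat} :
    (List.replicate n x).getD i d = if i < n then x else d := by
  rcases Nat.lt_or_ge i n with hlt | hge
  · rw [List.getD_eq_getElem _ _ (by simpa using hlt)]; simp [hlt]
  · rw [List.getD_eq_default _ _ (by simpa using hge)]; simp [Nat.not_lt.mpr hge]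

theorem vGet_replicate {h w : Nat} {r c : Int} :
    vGet (List.replicate h (List.replicate w false)) r c = false := by
  unfold vGet
  rw [getD_replicate]
  split
  · rw [getD_replicate]; split <;> rfl
  · simp

theorem mGet_replicate {h w : Nat} {r c : Int} :
    mGet (List.replicate h (List.replicate w (-1 : Int))) r c = -1 := by
  unfold mGet
  rw [getD_replicate]
  split
  · rw [getD_replicate]; split <;> rfl
  · simp

theorem dims2_set_row {α : Type} {m : List (List α)} {h w : Int} (hd : Dims2 m h w)
    {i : Nat} {row : List α} (hlen : (row.length : Int) = w) :
    Dims2 (m.set i row) h w := by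
  refine ⟨by simpa using hd.1, ?_⟩
  intro r hr
  rcases List.mem_or_eq_of_mem_set hr with hmem | rfl
  · exact hd.2 r hmem
  · exact hlen
theorem getD_set_self {α : Type} {l : List α} {i : Nat} (hi : i < l.length) {x d : α} :
    (l.set i x).getD i d = x := by
  rw [List.getD_eq_getElem _ _ (by simpa using hi)]
  simp [List.getElem_set_self]

theorem getD_set_ne {α : Type} {l : List α} {i j : Nat} (hij : i ≠ j) {x d : α} :
    (l.set i x).getD j d = l.getD j d := by
  simp [List.getD, List.getElem?_set_ne hij]

theorem rowOf_mem {α : Type} {m : List (List α)} {h w : Int} (hd : Dims2 m h w)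
    {r : Int} (hr0 : 0 ≤ r) (hrh : r < h) : m.getD r.toNat [] ∈ m := by
  have hlen := hd.1
  have : r.toNat < m.length := by omega
  rw [List.getD_eq_getElem _ _ this]
  exact List.getElem_mem this

theorem vGet_vSet {v : List (List Bool)} {h w : Int} (hd : Dims2 v h w) {r c r' c' : Int}
    (hin : InB h w (r, c)) (hin' : InB h w (r', c')) :
    vGet (vSet v r c) r' c' = if r' = r ∧ c' = c then true else vGet v r' c' := by
  have hr0 : 0 ≤ r := hin.1
  have hrh : r < h := hin.2.1
  have hc0 : 0 ≤ c := hin.2.2.1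
  have hcw : c < w := hin.2.2.2
  have hr0' : 0 ≤ r' := hin'.1
  have hrh' : r' < h := hin'.2.1
  have hc0' : 0 ≤ c' := hin'.2.2.1
  have hcw' : c' < w := hin'.2.2.2
  have hlen := hd.1
  have hrlen : r.toNat < v.length := by omega
  have hrow : v.getD r.toNat [] ∈ v := rowOf_mem hd hr0 hrh
  have hrowlen : ((v.getD r.toNat []).length : Int) = w := hd.2 _ hrow
  have hclen : c.toNat < (v.getD r.toNat []).length := by omega
  by_cases hrr : r' = r
  · subst hrr
    by_cases hcc : c' = c
    · subst hcc
      rw [if_pos ⟨rfl, rfl⟩]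
      unfold vGet vSet
      rw [getD_set_self hrlen, getD_set_self hclen]
    · rw [if_neg (fun hcon => hcc hcon.2)]
      unfold vGet vSet
      rw [getD_set_self hrlen, getD_set_ne (by omega)]
  · rw [if_neg (fun hcon => hrr hcon.1)]
    unfold vGet vSet
    rw [getD_set_ne (by omega : r.toNat ≠ r'.toNat)]

theorem mGet_mSet {m : List (List Int)} {h w : Int} (hd : Dims2 m h w) {r c r' c' : Int}
    {x : Int} (hin : InB h w (r, c)) (hin' : InB h w (r', c')) :
    mGet (mSet m r c x) r' c' = if r' = r ∧ c' = c then x else mGet m r' c' := by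
  have hr0 : 0 ≤ r := hin.1
  have hrh : r < h := hin.2.1
  have hc0 : 0 ≤ c := hin.2.2.1
  have hcw : c < w := hin.2.2.2
  have hr0' : 0 ≤ r' := hin'.1
  have hrh' : r' < h := hin'.2.1
  have hc0' : 0 ≤ c' := hin'.2.2.1
  have hcw' : c' < w := hin'.2.2.2
  have hlen := hd.1
  have hrlen : r.toNat < m.length := by omega
  have hrow : m.getD r.toNat [] ∈ m := rowOf_mem hd hr0 hrh
  have hrowlen : ((m.getD r.toNat []).length : Int) = w := hd.2 _ hrow
  have hclen : c.toNat < (m.getD r.toNat []).length := by omega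
  by_cases hrr : r' = r
  · subst hrr
    by_cases hcc : c' = c
    · subst hcc
      rw [if_pos ⟨rfl, rfl⟩]
      unfold mGet mSet
      rw [getD_set_self hrlen, getD_set_self hclen]
    · rw [if_neg (fun hcon => hcc hcon.2)]
      unfold mGet mSet
      rw [getD_set_self hrlen, getD_set_ne (by omega)]
  · rw [if_neg (fun hcon => hrr hcon.1)]
    unfold mGet mSet
    rw [getD_set_ne (by omega : r.toNat ≠ r'.toNat)]

theorem dims2_vSet {v : List (List Bool)} {h w : Int} (hd : Dims2 v h w) {r c : Int}
    (hin : InB h w (r, c)) : Dims2 (vSet v r c) h w := by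
  apply dims2_set_row hd
  simp only [List.length_set]
  exact hd.2 _ (rowOf_mem hd hin.1 hin.2.1)

theorem dims2_mSet {m : List (List Int)} {h w : Int} (hd : Dims2 m h w) {r c x : Int}
    (hin : InB h w (r, c)) : Dims2 (mSet m r c x) h w := by
  apply dims2_set_row hd
  simp only [List.length_set]
  exact hd.2 _ (rowOf_mem hd hin.1 hin.2.1)

theorem count_false_set : ∀ (row : List Bool) (j : Nat), j < row.length →
    row.getD j true = false → (row.set j true).count false + 1 = row.count false := by
  intro row
  induction row with
  | nil => intro j hj; simp at hj
  | cons a t ih =>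
    intro j hj hf
    cases j with
    | zero =>
      simp only [List.getD_cons_zero] at hf; subst hf
      simp
    | succ j =>
      simp only [List.getD_cons_succ] at hf
      simp only [List.set_cons_succ, List.count_cons]
      have := ih j (by simpa using hj) hf
      omega

theorem sum_map_set : ∀ (l : List (List Bool)) (i : Nat), i < l.length →
    ∀ row, ((l.set i row).map (fun r => r.count false)).sum + (l.getD i []).count false
      = (l.map (fun r => r.count false)).sum + row.count false := by
  intro l
  induction l with
  | nil => intro i hi; simp at hi
  | cons a t ih =>
    intro i hi row
    cases i with
    | zero => simp; omega
    | succ i =>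
      simp only [List.set_cons_succ, List.map_cons, List.sum_cons, List.getD_cons_succ]
      have := ih i (by simpa using hi) row
      omega

theorem countFalse_vSet {v : List (List Bool)} {h w : Int} (hd : Dims2 v h w) {r c : Int}
    (hin : InB h w (r, c)) (hf : vGet v r c = false) :
    countFalse (vSet v r c) + 1 = countFalse v := by
  have hr0 : 0 ≤ r := hin.1
  have hrh : r < h := hin.2.1
  have hc0 : 0 ≤ c := hin.2.2.1
  have hcw : c < w := hin.2.2.2
  have hlen := hd.1
  have hrlen : r.toNat < v.length := by omega
  have hrow : v.getD r.toNat [] ∈ v := rowOf_mem hd hr0 hrh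
  have hrowlen : ((v.getD r.toNat []).length : Int) = w := hd.2 _ hrow
  have hclen : c.toNat < (v.getD r.toNat []).length := by omega
  have hget : (v.getD r.toNat []).getD c.toNat true = false := by
    unfold vGet at hf
    rw [List.getD_eq_getElem _ _ hclen] at hf ⊢
    exact hf
  unfold countFalse vSet
  have h1 := sum_map_set v r.toNat hrlen ((v.getD r.toNat []).set c.toNat true)
  have h2 := count_false_set (v.getD r.toNat []) c.toNat hclen hget
  omega

theorem countFalse_le {v : List (List Bool)} {h w : Int} (hd : Dims2 v h w) :
    countFalse v ≤ h.toNat * w.toNat := by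
  unfold countFalse
  have hb : ∀ x ∈ v.map (fun r => r.count false), x ≤ w.toNat := by
    intro x hx
    obtain ⟨row, hrow, rfl⟩ := List.mem_map.mp hx
    have := hd.2 _ hrow
    calc row.count false ≤ row.length := List.count_le_length
    _ = w.toNat := by omega
  have := List.sum_le_card_nsmul _ _ hb
  simp only [List.length_map, smul_eq_mul] at this
  have hlen : v.length = h.toNat := by have := hd.1; omega
  calc (v.map (fun r => r.count false)).sum ≤ v.length * w.toNat := this
  _ = h.toNat * w.toNat := by rw [hlen]

-- the step function of A's inner neighbour fold (literally the lambda in the port)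
def bStep (g : List (List Int)) (h w barrier nid cr cc : Int) :
    List (Int × Int) × List (List Bool) × List (List Int) → Int × Int →
    List (Int × Int) × List (List Bool) × List (List Int) := fun st d =>
  let nr := cr + d.1
  let nc := cc + d.2
  if 0 ≤ nr ∧ nr < h ∧ 0 ≤ nc ∧ nc < w ∧ vGet st.2.1 nr nc = false ∧ cellAt g nr nc ≠ barrier
  then (st.1 ++ [(nr, nc)], vSet st.2.1 nr nc, mSet st.2.2 nr nc nid)
  else st

-- what a neighbour fold does, for any direction list with pairwise-distinct images
theorem bDirs_spec (g : List (List Int)) (h w barrier nid cr cc : Int) :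
    ∀ (ds : List (Int × Int)),
    (ds.map (fun d => (cr + d.1, cc + d.2))).Nodup →
    ∀ (q : List (Int × Int)) (vis : List (List Bool)) (cid : List (List Int)),
    Dims2 vis h w → Dims2 cid h w →
    ∃ nl : List (Int × Int),
      (ds.foldl (bStep g h w barrier nid cr cc) (q, vis, cid)).1 = q ++ nl ∧
      nl.Nodup ∧
      (∀ p : Int × Int, p ∈ nl ↔ (∃ d ∈ ds, p = (cr + d.1, cc + d.2)) ∧ InB h w p ∧
        vGet vis p.1 p.2 = false ∧ cellAt g p.1 p.2 ≠ barrier) ∧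
      Dims2 (ds.foldl (bStep g h w barrier nid cr cc) (q, vis, cid)).2.1 h w ∧
      Dims2 (ds.foldl (bStep g h w barrier nid cr cc) (q, vis, cid)).2.2 h w ∧
      (∀ r c : Int, InB h w (r, c) →
        ((vGet (ds.foldl (bStep g h w barrier nid cr cc) (q, vis, cid)).2.1 r c = true) ↔
          (vGet vis r c = true ∨ (r, c) ∈ nl))) ∧
      (∀ r c : Int, InB h w (r, c) →
        ((r, c) ∈ nl → mGet (ds.foldl (bStep g h w barrier nid cr cc) (q, vis, cid)).2.2 r c = nid) ∧
        ((r, c) ∉ nl → mGet (ds.foldl (bStep g h w barrier nid cr cc) (q, vis, cid)).2.2 r c = mGet cid r c)) ∧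
      countFalse (ds.foldl (bStep g h w barrier nid cr cc) (q, vis, cid)).2.1 + nl.length = countFalse vis := by
  intro ds
  induction ds with
  | nil =>
    intro _ q vis cid hdv hdc
    exact ⟨[], by simp, by simp, by simp, hdv, hdc, by simp, by simp, by simp⟩
  | cons d ds ih =>
    intro hnd q vis cid hdv hdc
    have hnd' : (ds.map (fun d => (cr + d.1, cc + d.2))).Nodup := (List.nodup_cons.mp hnd).2
    have hdimg : (cr + d.1, cc + d.2) ∉ ds.map (fun d => (cr + d.1, cc + d.2)) :=
      (List.nodup_cons.mp hnd).1
    set p : Int × Int := (cr + d.1, cc + d.2) with hp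
    by_cases hC : 0 ≤ cr + d.1 ∧ cr + d.1 < h ∧ 0 ≤ cc + d.2 ∧ cc + d.2 < w ∧
        vGet vis (cr + d.1) (cc + d.2) = false ∧ cellAt g (cr + d.1) (cc + d.2) ≠ barrier
    · -- the neighbour is enqueued and marked
      have hinp : InB h w p := ⟨hC.1, hC.2.1, hC.2.2.1, hC.2.2.2.1⟩
      have hunf : (d :: ds).foldl (bStep g h w barrier nid cr cc) (q, vis, cid) =
          ds.foldl (bStep g h w barrier nid cr cc)
            (q ++ [p], vSet vis p.1 p.2, mSet cid p.1 p.2 nid) := by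
        simp only [List.foldl_cons, bStep, hp]
        rw [if_pos hC]
      obtain ⟨nl₂, hq2, hnd2, hmem2, hdv2, hdc2, hvget2, hmget2, hcnt2⟩ :=
        ih hnd' (q ++ [p]) (vSet vis p.1 p.2) (mSet cid p.1 p.2 nid)
          (dims2_vSet hdv hinp) (dims2_mSet hdc hinp)
      have hpnotin : p ∉ nl₂ := by
        intro hmem
        obtain ⟨_, hin2, hfalse, _⟩ := (hmem2 p).mp hmem
        rw [vGet_vSet hdv hinp hin2, if_pos ⟨rfl, rfl⟩] at hfalse
        exact Bool.noConfusion hfalse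
      refine ⟨p :: nl₂, ?_, ?_, ?_, ?_, ?_, ?_, ?_, ?_⟩
      · rw [hunf, hq2, List.append_assoc]; rfl
      · exact List.nodup_cons.mpr ⟨hpnotin, hnd2⟩
      · intro p'
        constructor
        · intro hmem
          rcases List.mem_cons.mp hmem with rfl | hmem
          · exact ⟨⟨d, List.mem_cons_self, rfl⟩, hinp, hC.2.2.2.2.1, hC.2.2.2.2.2⟩
          · obtain ⟨⟨d', hd', rfl⟩, hin', hfalse, hcell⟩ := (hmem2 p').mp hmem
            have hne : (cr + d'.1, cc + d'.2) ≠ p := by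
              intro he; exact hdimg (he ▸ List.mem_map_of_mem hd')
            rw [vGet_vSet hdv hinp hin'] at hfalse
            rw [if_neg (by simpa [hp, Prod.ext_iff] using hne)] at hfalse
            exact ⟨⟨d', List.mem_cons_of_mem _ hd', rfl⟩, hin', hfalse, hcell⟩
        · rintro ⟨⟨d', hd', rfl⟩, hin', hfalse, hcell⟩
          rcases List.mem_cons.mp hd' with rfl | hd'
          · exact List.mem_cons_self
          · have hne : (cr + d'.1, cc + d'.2) ≠ p := by
              intro he; exact hdimg (he ▸ List.mem_map_of_mem hd')
            refine List.mem_cons_of_mem _ ((hmem2 _).mpr ⟨⟨d', hd', rfl⟩, hin', ?_, hcell⟩)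
            rw [vGet_vSet hdv hinp hin', if_neg (by simpa [hp, Prod.ext_iff] using hne)]
            exact hfalse
      · rw [hunf]; exact hdv2
      · rw [hunf]; exact hdc2
      · intro r c hin
        rw [hunf, hvget2 r c hin, vGet_vSet hdv hinp hin]
        by_cases hrc : r = p.1 ∧ c = p.2
        · have hpe : ((r, c) : Int × Int) = p := by
            obtain ⟨h1, h2⟩ := hrc
            obtain ⟨p1, p2⟩ := p
            simp_all
          rw [if_pos hrc]
          simp [hpe]
        · have hpe : ((r, c) : Int × Int) ≠ p := by
            intro he
            apply hrc
            rw [← he]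
            exact ⟨rfl, rfl⟩
          rw [if_neg hrc, List.mem_cons]
          constructor
          · rintro (hv | hm)
            exacts [Or.inl hv, Or.inr (Or.inr hm)]
          · rintro (hv | hpp | hm)
            exacts [Or.inl hv, absurd hpp hpe, Or.inr hm]
      · intro r c hin
        rw [hunf]
        obtain ⟨hset, hkeep⟩ := hmget2 r c hin
        constructor
        · intro hmem
          rcases List.mem_cons.mp hmem with heq | hmem
          · by_cases h2 : ((r, c) : Int × Int) ∈ nl₂
            · exact hset h2
            · rw [hkeep h2, mGet_mSet hdc hinp hin,
                if_pos ⟨congrArg Prod.fst heq, congrArg Prod.snd heq⟩]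
          · exact hset hmem
        · intro hmem
          have h2 : ((r, c) : Int × Int) ∉ nl₂ := fun hh => hmem (List.mem_cons_of_mem _ hh)
          have hne : ¬(r = p.1 ∧ c = p.2) := by
            intro hh
            apply hmem
            have : ((r, c) : Int × Int) = p := by
              obtain ⟨p1, p2⟩ := p
              simp_all
            rw [this]
            exact List.mem_cons_self
          rw [hkeep h2, mGet_mSet hdc hinp hin, if_neg hne]
      · rw [hunf]
        have hc1 : countFalse (vSet vis p.1 p.2) + 1 = countFalse vis :=
          countFalse_vSet hdv hinp hC.2.2.2.2.1
        simp only [List.length_cons]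
        omega
    · -- condition false: nothing happens for this direction
      have hunf : (d :: ds).foldl (bStep g h w barrier nid cr cc) (q, vis, cid) =
          ds.foldl (bStep g h w barrier nid cr cc) (q, vis, cid) := by
        simp only [List.foldl_cons, bStep]
        rw [if_neg hC]
      obtain ⟨nl₂, hq2, hnd2, hmem2, hdv2, hdc2, hvget2, hmget2, hcnt2⟩ :=
        ih hnd' q vis cid hdv hdc
      rw [hunf]
      refine ⟨nl₂, hq2, hnd2, ?_, hdv2, hdc2, hvget2, hmget2, hcnt2⟩
      intro p'
      rw [hmem2 p']
      constructor
      · rintro ⟨⟨d', hd', rfl⟩, hin', hf, hc⟩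
        exact ⟨⟨d', List.mem_cons_of_mem _ hd', rfl⟩, hin', hf, hc⟩
      · rintro ⟨⟨d', hd', rfl⟩, hin', hf, hc⟩
        rcases List.mem_cons.mp hd' with rfl | hd'
        · exact absurd ⟨hin'.1, hin'.2.1, hin'.2.2.1, hin'.2.2.2, hf, hc⟩ hC
        · exact ⟨⟨d', hd', rfl⟩, hin', hf, hc⟩

def RSet (g : List (List Int)) (h w barrier : Int) (q : List (Int × Int)) (p : Int × Int) : Prop :=
  ∃ s ∈ q, ReachC g h w barrier s p

theorem adjC_iff_dirs4 {cr cc : Int} {p : Int × Int} :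
    (∃ d ∈ [((-1 : Int), (0 : Int)), (1, 0), (0, -1), (0, 1)], p = (cr + d.1, cc + d.2)) ↔
      AdjC (cr, cc) p := by
  obtain ⟨a, b⟩ := p
  constructor
  · rintro ⟨d, hd, he⟩
    rcases List.mem_cons.mp hd with rfl | hd
    · left; simpa using he
    rcases List.mem_cons.mp hd with rfl | hd
    · right; left; simpa using he
    rcases List.mem_cons.mp hd with rfl | hd
    · right; right; left; simpa using he
    rcases List.mem_cons.mp hd with rfl | hd
    · right; right; right; simpa using he
    · simp at hd
  · rintro (he | he | he | he)
    · exact ⟨(-1, 0), by simp, by simpa using he⟩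
    · exact ⟨(1, 0), by simp [List.mem_cons], by simpa using he⟩
    · exact ⟨(0, -1), by simp [List.mem_cons], by simpa using he⟩
    · exact ⟨(0, 1), by simp [List.mem_cons], by simpa using he⟩

theorem dirs4_images_nodup {cr cc : Int} :
    (([((-1 : Int), (0 : Int)), (1, 0), (0, -1), (0, 1)]).map
      (fun d => (cr + d.1, cc + d.2))).Nodup := by
  simp [List.nodup_cons, Prod.ext_iff]

theorem reach_expand (g : List (List Int)) (h w barrier : Int) (vis : List (List Bool))
    (p₀ : Int × Int) (rest nl q₂ : List (Int × Int))
    (hm : ∀ p ∈ p₀ :: rest, vGet vis p.1 p.2 = true)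
    (hclosed : ∀ p, InB h w p → vGet vis p.1 p.2 = true → p ∉ p₀ :: rest →
      ∀ n, StepC g h w barrier p n → vGet vis n.1 n.2 = true)
    (hnl : ∀ p, p ∈ nl ↔ StepC g h w barrier p₀ p ∧ vGet vis p.1 p.2 = false)
    (hq₂ : ∀ p, p ∈ q₂ ↔ p ∈ rest ∨ p ∈ nl) :
    ∀ x p, ReachC g h w barrier x p →
      (x = p₀ ∨ (InB h w x ∧ vGet vis x.1 x.2 = true ∧ x ∉ p₀ :: rest)) →
      vGet vis p.1 p.2 = true ∨ RSet g h w barrier q₂ p := by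
  intro x p hreach
  induction hreach using Relation.ReflTransGen.head_induction_on with
  | refl =>
    rintro (rfl | ⟨_, hmk, _⟩)
    · exact Or.inl (hm _ List.mem_cons_self)
    · exact Or.inl hmk
  | @head x n hstep htail ih =>
    intro hx
    by_cases hmn : vGet vis n.1 n.2 = true
    · by_cases hn0 : n = p₀
      · exact ih (Or.inl hn0)
      · by_cases hnr : n ∈ rest
        · exact Or.inr ⟨n, (hq₂ n).mpr (Or.inl hnr), htail⟩
        · have hnin : n ∉ p₀ :: rest := by
            intro hmem
            rcases List.mem_cons.mp hmem with he | he
            exacts [hn0 he, hnr he]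
          exact ih (Or.inr ⟨hstep.2.1.1, hmn, hnin⟩)
    · rcases hx with rfl | ⟨hxin, hxmk, hxnot⟩
      · have : n ∈ nl := (hnl n).mpr ⟨hstep, by simpa using hmn⟩
        exact Or.inr ⟨n, (hq₂ n).mpr (Or.inr this), htail⟩
      · exact absurd (hclosed x hxin hxmk hxnot n hstep) hmn

theorem reach_contract (g : List (List Int)) (h w barrier : Int) (vis : List (List Bool))
    (p₀ : Int × Int) (rest nl q₂ : List (Int × Int))
    (hnl : ∀ p, p ∈ nl ↔ StepC g h w barrier p₀ p ∧ vGet vis p.1 p.2 = false)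
    (hq₂ : ∀ p, p ∈ q₂ ↔ p ∈ rest ∨ p ∈ nl) :
    ∀ p, RSet g h w barrier q₂ p → RSet g h w barrier (p₀ :: rest) p := by
  rintro p ⟨s, hs, hpath⟩
  rcases (hq₂ s).mp hs with hr | hn
  · exact ⟨s, List.mem_cons_of_mem _ hr, hpath⟩
  · exact ⟨p₀, List.mem_cons_self, Relation.ReflTransGen.head ((hnl s).mp hn).1 hpath⟩


theorem bfsLoop_spec (g : List (List Int)) (h w barrier nid : Int) :
    ∀ (fuel : Nat) (q : List (Int × Int)) (vis : List (List Bool)) (cid : List (List Int))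
      (size minr minc : Int),
    Dims2 vis h w → Dims2 cid h w → q.Nodup →
    (∀ p ∈ q, InB h w p ∧ vGet vis p.1 p.2 = true ∧ OkC g h w barrier p) →
    (∀ p, InB h w p → vGet vis p.1 p.2 = true → p ∉ q →
      ∀ n, StepC g h w barrier p n → vGet vis n.1 n.2 = true) →
    countFalse vis + q.length ≤ fuel →
    ∃ pl : List (Int × Int),
      pl.Nodup ∧
      (∀ p : Int × Int, p ∈ pl ↔ (p ∈ q ∨ (InB h w p ∧ vGet vis p.1 p.2 = false ∧
        RSet g h w barrier q p))) ∧
      Dims2 (bfsLoop g h w barrier nid fuel q vis cid size minr minc).1 h w ∧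
      Dims2 (bfsLoop g h w barrier nid fuel q vis cid size minr minc).2.1 h w ∧
      (∀ r c : Int, InB h w (r, c) →
        ((vGet (bfsLoop g h w barrier nid fuel q vis cid size minr minc).1 r c = true) ↔
          (vGet vis r c = true ∨ RSet g h w barrier q (r, c)))) ∧
      (∀ r c : Int, InB h w (r, c) →
        (((r, c) ∈ pl ∧ (r, c) ∉ q) →
          mGet (bfsLoop g h w barrier nid fuel q vis cid size minr minc).2.1 r c = nid) ∧
        (((r, c) ∉ pl ∨ (r, c) ∈ q) →
          mGet (bfsLoop g h w barrier nid fuel q vis cid size minr minc).2.1 r c = mGet cid r c)) ∧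
      (bfsLoop g h w barrier nid fuel q vis cid size minr minc).2.2.1 = size + pl.length ∧
      (bfsLoop g h w barrier nid fuel q vis cid size minr minc).2.2.2.1 =
        pl.foldl (fun m p => if p.1 < m then p.1 else m) minr ∧
      (bfsLoop g h w barrier nid fuel q vis cid size minr minc).2.2.2.2 =
        pl.foldl (fun m p => if p.2 < m then p.2 else m) minc := by
  intro fuel
  induction fuel with
  | zero =>
    intro q vis cid size minr minc hdv hdc hq hqm hclosed hfuel
    match q with
    | [] =>
      refine ⟨[], by simp, ?_, hdv, hdc, ?_, ?_, by simp [bfsLoop], by simp [bfsLoop], by simp [bfsLoop]⟩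
      · intro p; simp [RSet]
      · intro r c _; simp [bfsLoop, RSet]
      · intro r c _; simp [bfsLoop]
    | p₀ :: rest => exact absurd hfuel (by simp only [List.length_cons]; omega)
  | succ fuel ih =>
    intro q vis cid size minr minc hdv hdc hq hqm hclosed hfuel
    match q with
    | [] =>
      refine ⟨[], by simp, ?_, hdv, hdc, ?_, ?_, by simp [bfsLoop], by simp [bfsLoop], by simp [bfsLoop]⟩
      · intro p; simp [RSet]
      · intro r c _; simp [bfsLoop, RSet]
      · intro r c _; simp [bfsLoop]
    | (cr, cc) :: rest =>
      -- peel one BFS iteration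
      have hunf : bfsLoop g h w barrier nid (fuel + 1) ((cr, cc) :: rest) vis cid size minr minc =
          bfsLoop g h w barrier nid fuel
            (([((-1 : Int), (0 : Int)), (1, 0), (0, -1), (0, 1)].foldl
              (bStep g h w barrier nid cr cc) (rest, vis, cid))).1
            (([((-1 : Int), (0 : Int)), (1, 0), (0, -1), (0, 1)].foldl
              (bStep g h w barrier nid cr cc) (rest, vis, cid))).2.1
            (([((-1 : Int), (0 : Int)), (1, 0), (0, -1), (0, 1)].foldl
              (bStep g h w barrier nid cr cc) (rest, vis, cid))).2.2
            (size + 1) (if cr < minr then cr else minr) (if cc < minc then cc else minc) := rfl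
      obtain ⟨hp0in, hp0mk, hp0ok⟩ := hqm (cr, cc) List.mem_cons_self
      obtain ⟨nl, hq2eq, hnlnd, hnlmem, hdv2, hdc2, hvgetF, hmgetF, hcntF⟩ :=
        bDirs_spec g h w barrier nid cr cc _ dirs4_images_nodup rest vis cid hdv hdc
      set F := ([((-1 : Int), (0 : Int)), (1, 0), (0, -1), (0, 1)].foldl
        (bStep g h w barrier nid cr cc) (rest, vis, cid)) with hF
      have hrestnd : rest.Nodup := (List.nodup_cons.mp hq).2
      have hp0nr : (cr, cc) ∉ rest := (List.nodup_cons.mp hq).1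
      -- the enqueued neighbours, described through StepC
      have hnlStep : ∀ p : Int × Int, p ∈ nl ↔
          StepC g h w barrier (cr, cc) p ∧ vGet vis p.1 p.2 = false := by
        intro p
        rw [hnlmem p]
        constructor
        · rintro ⟨hd, hin, hf, hc⟩
          exact ⟨⟨hp0ok, ⟨hin, hc⟩, adjC_iff_dirs4.mp hd⟩, hf⟩
        · rintro ⟨⟨_, ⟨hin, hc⟩, hadj⟩, hf⟩
          exact ⟨adjC_iff_dirs4.mpr hadj, hin, hf, hc⟩
      have hq₂mem : ∀ p : Int × Int, p ∈ rest ++ nl ↔ p ∈ rest ∨ p ∈ nl := by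
        intro p; exact List.mem_append
      -- members of nl are unmarked in vis, members of rest marked: disjoint
      have hq₂nd : (rest ++ nl).Nodup := by
        refine hrestnd.append hnlnd ?_
        intro a ha hb
        have h1 := (hqm a (List.mem_cons_of_mem _ ha)).2.1
        have h2 := ((hnlmem a).mp hb).2.2.1
        rw [h1] at h2
        exact Bool.noConfusion h2
      have hqm₂ : ∀ p ∈ rest ++ nl, InB h w p ∧ vGet F.2.1 p.1 p.2 = true ∧
          OkC g h w barrier p := by
        intro p hp
        rcases List.mem_append.mp hp with hr | hn
        · obtain ⟨hin, hmk, hok⟩ := hqm p (List.mem_cons_of_mem _ hr)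
          exact ⟨hin, (hvgetF p.1 p.2 hin).mpr (Or.inl hmk), hok⟩
        · obtain ⟨hstep, _⟩ := (hnlStep p).mp hn
          have hin : InB h w p := hstep.2.1.1
          exact ⟨hin, (hvgetF p.1 p.2 hin).mpr (Or.inr hn), hstep.2.1⟩
      have hclosed₂ : ∀ p, InB h w p → vGet F.2.1 p.1 p.2 = true → p ∉ rest ++ nl →
          ∀ n, StepC g h w barrier p n → vGet F.2.1 n.1 n.2 = true := by
        intro p hin hmk₂ hnot₂ n hstep
        have hnin : InB h w n := hstep.2.1.1
        rcases (hvgetF p.1 p.2 hin).mp hmk₂ with hmk | hnl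
        · by_cases hp0e : p = (cr, cc)
          · subst hp0e
            by_cases hmn : vGet vis n.1 n.2 = true
            · exact (hvgetF n.1 n.2 hnin).mpr (Or.inl hmn)
            · refine (hvgetF n.1 n.2 hnin).mpr (Or.inr ?_)
              exact (hnlStep n).mpr ⟨⟨hp0ok, hstep.2.1, hstep.2.2⟩, by simpa using hmn⟩
          · have hpq : p ∉ (cr, cc) :: rest := by
              intro hmem
              rcases List.mem_cons.mp hmem with he | he
              · exact hp0e he
              · exact hnot₂ (List.mem_append.mpr (Or.inl he))
            exact (hvgetF n.1 n.2 hnin).mpr (Or.inl (hclosed p hin hmk hpq n hstep))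
        · exact absurd (List.mem_append.mpr (Or.inr hnl)) hnot₂
      have hfuel₂ : countFalse F.2.1 + (rest ++ nl).length ≤ fuel := by
        simp only [List.length_append]
        simp only [List.length_cons] at hfuel
        omega
      obtain ⟨pl₂, hplnd₂, hplmem₂, hdvr, hdcr, hvgetR, hmgetR, hsizeR, hminrR, hmincR⟩ :=
        ih (rest ++ nl) F.2.1 F.2.2 (size + 1) (if cr < minr then cr else minr)
          (if cc < minc then cc else minc) hdv2 hdc2 hq₂nd hqm₂ hclosed₂ hfuel₂
      rw [hq2eq] at hunf
      -- key transfer between (vis, q) and (F.2.1, rest ++ nl)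
      have hexp := reach_expand g h w barrier vis (cr, cc) rest nl (rest ++ nl)
        (fun p hp => (hqm p hp).2.1) hclosed hnlStep hq₂mem
      have hcon := reach_contract g h w barrier vis (cr, cc) rest nl (rest ++ nl)
        hnlStep hq₂mem
      have hRq : ∀ p : Int × Int, RSet g h w barrier ((cr, cc) :: rest) p →
          vGet vis p.1 p.2 = true ∨ RSet g h w barrier (rest ++ nl) p := by
        rintro p ⟨s, hs, hpath⟩
        rcases List.mem_cons.mp hs with rfl | hsr
        · exact hexp _ p hpath (Or.inl rfl)
        · exact Or.inr ⟨s, List.mem_append.mpr (Or.inl hsr), hpath⟩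
      have hnlR : ∀ p : Int × Int, p ∈ nl → RSet g h w barrier ((cr, cc) :: rest) p := by
        intro p hp
        exact ⟨(cr, cc), List.mem_cons_self, Relation.ReflTransGen.single ((hnlStep p).mp hp).1⟩
      have hKEY : ∀ r c : Int, InB h w (r, c) →
          ((vGet vis r c = true ∨ RSet g h w barrier ((cr, cc) :: rest) (r, c)) ↔
            (vGet F.2.1 r c = true ∨ RSet g h w barrier (rest ++ nl) (r, c))) := by
        intro r c hin
        constructor
        · rintro (hmk | hR)
          · exact Or.inl ((hvgetF r c hin).mpr (Or.inl hmk))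
          · rcases hRq _ hR with hmk | hR2
            · exact Or.inl ((hvgetF r c hin).mpr (Or.inl hmk))
            · exact Or.inr hR2
        · rintro (hmk₂ | hR2)
          · rcases (hvgetF r c hin).mp hmk₂ with hmk | hnl
            · exact Or.inl hmk
            · exact Or.inr (hnlR _ hnl)
          · exact Or.inr (hcon _ hR2)
      -- the popped list
      refine ⟨(cr, cc) :: pl₂, ?_, ?_, by rw [hunf]; exact hdvr, by rw [hunf]; exact hdcr,
        ?_, ?_, ?_, ?_, ?_⟩
      · -- nodup
        refine List.nodup_cons.mpr ⟨?_, hplnd₂⟩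
        intro hmem
        rcases (hplmem₂ _).mp hmem with hq2 | ⟨_, hf, _⟩
        · rcases List.mem_append.mp hq2 with hr | hn
          · exact hp0nr hr
          · have := ((hnlmem _).mp hn).2.2.1
            rw [hp0mk] at this
            exact Bool.noConfusion this
        · have hT : vGet F.2.1 cr cc = true := (hvgetF cr cc hp0in).mpr (Or.inl hp0mk)
          have hf' : vGet F.2.1 cr cc = false := hf
          rw [hT] at hf'
          exact Bool.noConfusion hf'
      · -- membership of the popped list
        intro p
        rw [List.mem_cons, hplmem₂ p]
        constructor
        · rintro (rfl | hq2 | ⟨hin, hf, hR⟩)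
          · exact Or.inl List.mem_cons_self
          · rcases List.mem_append.mp hq2 with hr | hn
            · exact Or.inl (List.mem_cons_of_mem _ hr)
            · obtain ⟨_, hin, hf, _⟩ := (hnlmem p).mp hn
              exact Or.inr ⟨hin, hf, hnlR p hn⟩
          · have hvf : vGet vis p.1 p.2 = false := by
              by_cases hv : vGet vis p.1 p.2 = true
              · rw [(hvgetF p.1 p.2 hin).mpr (Or.inl hv)] at hf
                exact Bool.noConfusion hf
              · simpa using hv
            exact Or.inr ⟨hin, hvf, hcon p hR⟩
        · rintro (hpq | ⟨hin, hf, hR⟩)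
          · rcases List.mem_cons.mp hpq with rfl | hr
            · exact Or.inl rfl
            · have hin := (hqm p (List.mem_cons_of_mem _ hr)).1
              exact Or.inr (Or.inl (List.mem_append.mpr (Or.inl hr)))
          · by_cases hp0e : p = (cr, cc)
            · exact Or.inl hp0e
            · have hR2 : RSet g h w barrier (rest ++ nl) p := by
                rcases hRq p hR with hmk | hR2
                · rw [hf] at hmk; exact Bool.noConfusion hmk
                · exact hR2
              by_cases hnl : p ∈ nl
              · exact Or.inr (Or.inl (List.mem_append.mpr (Or.inr hnl)))
              · refine Or.inr (Or.inr ⟨hin, ?_, hR2⟩)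
                cases hvF : vGet F.2.1 p.1 p.2
                · rfl
                · rcases (hvgetF p.1 p.2 hin).mp hvF with hmk | hnl'
                  · rw [hf] at hmk; exact Bool.noConfusion hmk
                  · exact absurd hnl' hnl
      · -- final visited set
        intro r c hin
        rw [hunf]
        exact Iff.trans (hvgetR r c hin) (hKEY r c hin).symm
      · -- final comp_id values
        intro r c hin
        obtain ⟨hset₂, hkeep₂⟩ := hmgetR r c hin
        obtain ⟨hnid_d, hkeep_d⟩ := hmgetF r c hin
        constructor
        · rintro ⟨hpl, hnq⟩
          rw [hunf]
          have hne0 : ((r, c) : Int × Int) ≠ (cr, cc) := fun he => hnq (he ▸ List.mem_cons_self)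
          have hpl₂ : ((r, c) : Int × Int) ∈ pl₂ := by
            rcases List.mem_cons.mp hpl with he | hh
            exacts [absurd he hne0, hh]
          by_cases hq₂m : ((r, c) : Int × Int) ∈ rest ++ nl
          · rcases List.mem_append.mp hq₂m with hr | hn
            · exact absurd (List.mem_cons_of_mem _ hr) hnq
            · rw [hkeep₂ (Or.inr hq₂m)]
              exact hnid_d hn
          · exact hset₂ ⟨hpl₂, hq₂m⟩
        · intro hor
          rw [hunf]
          rcases hor with hnpl | hqmem
          · have hnpl₂ : ((r, c) : Int × Int) ∉ pl₂ := fun hh => hnpl (List.mem_cons_of_mem _ hh)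
            have hnnl : ((r, c) : Int × Int) ∉ nl := by
              intro hh
              obtain ⟨_, hin', hf', _⟩ := (hnlmem _).mp hh
              exact hnpl ((List.mem_cons).mpr (Or.inr ((hplmem₂ _).mpr
                (Or.inl (List.mem_append.mpr (Or.inr hh))))))
            rw [hkeep₂ (Or.inl hnpl₂), hkeep_d hnnl]
          · have hmk : vGet vis r c = true := (hqm _ hqmem).2.1
            have hnnl : ((r, c) : Int × Int) ∉ nl := by
              intro hh
              have hf' := ((hnlmem _).mp hh).2.2.1
              rw [hmk] at hf'
              exact Bool.noConfusion hf'
            by_cases hpl₂ : ((r, c) : Int × Int) ∈ pl₂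
            · have hq₂m : ((r, c) : Int × Int) ∈ rest ++ nl := by
                rcases (hplmem₂ _).mp hpl₂ with hq2 | ⟨_, hfF, _⟩
                · exact hq2
                · have hT : vGet F.2.1 r c = true := (hvgetF r c hin).mpr (Or.inl hmk)
                  have hfF' : vGet F.2.1 r c = false := hfF
                  rw [hT] at hfF'
                  exact Bool.noConfusion hfF'
              rw [hkeep₂ (Or.inr hq₂m), hkeep_d hnnl]
            · rw [hkeep₂ (Or.inl hpl₂), hkeep_d hnnl]
      · rw [hunf, hsizeR]
        simp only [List.length_cons]
        push_cast
        ring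
      · rw [hunf, hminrR]
        rfl
      · rw [hunf, hmincR]
        rfl

theorem reach_marked {g : List (List Int)} {h w barrier : Int} {vis : List (List Bool)}
    (hclosedAll : ∀ p, InB h w p → vGet vis p.1 p.2 = true →
      ∀ n, StepC g h w barrier p n → vGet vis n.1 n.2 = true)
    {x y : Int × Int} (hr : ReachC g h w barrier x y) (hx : vGet vis x.1 x.2 = true) :
    vGet vis y.1 y.2 = true := by
  induction hr with
  | refl => exact hx
  | tail _ hstep ih => exact hclosedAll _ hstep.1.1 ih _ hstep

theorem foldl_nested {σ : Type} (f : σ → Int × Int → σ) (l1 l2 : List Int) :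
    ∀ (init : σ),
    l1.foldl (fun st r => l2.foldl (fun st c => f st (r, c)) st) init
      = (l1.flatMap (fun r => l2.map (fun c => (r, c)))).foldl f init := by
  induction l1 with
  | nil => intro init; rfl
  | cons r l1 ih =>
    intro init
    simp only [List.foldl_cons, List.flatMap_cons, List.foldl_append, List.foldl_map, ih]

def cellList (h w : Int) : List (Int × Int) :=
  (PySem.List.pyRange 0 h 1).flatMap (fun r => (PySem.List.pyRange 0 w 1).map (fun c => (r, c)))

theorem mem_cellList {h w : Int} {p : Int × Int} : p ∈ cellList h w ↔ InB h w p := by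
  unfold cellList InB
  rw [List.mem_flatMap]
  constructor
  · rintro ⟨r, hr, hm⟩
    rw [List.mem_map] at hm
    obtain ⟨c, hc, rfl⟩ := hm
    rw [PySem.List.mem_pyRange_one] at hr hc
    exact ⟨hr.1, hr.2, hc.1, hc.2⟩
  · rintro ⟨h1, h2, h3, h4⟩
    refine ⟨p.1, ?_, ?_⟩
    · rw [PySem.List.mem_pyRange_one]; exact ⟨h1, h2⟩
    · rw [List.mem_map]
      exact ⟨p.2, by rw [PySem.List.mem_pyRange_one]; exact ⟨h3, h4⟩, rfl⟩

-- counting: a pyRange-indexed fold is a fold over the list prefix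
theorem foldl_range_getD {α β : Type} (l : List α) (dflt : α) (F : β → α → β) :
    ∀ (n : Nat), n ≤ l.length → ∀ init : β,
    (PySem.List.pyRange 0 (n : Int) 1).foldl (fun acc i => F acc (l.getD i.toNat dflt)) init
      = (l.take n).foldl F init := by
  intro n
  induction n with
  | zero => intro _ init; rfl
  | succ n ihn =>
    intro hle init
    have hcast : ((n : Int) + 1) = ((n + 1 : Nat) : Int) := by push_cast; ring
    rw [← hcast, PySem.List.pyRange_one_succ_right (by positivity), List.foldl_append]
    have hn : n < l.length := by omega
    rw [ihn (by omega) init, List.take_add_one, List.foldl_append]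
    simp only [List.foldl_cons, List.foldl_nil, List.getElem?_eq_getElem hn]
    rw [Int.toNat_natCast, List.getD_eq_getElem l dflt hn]
    rfl

-- positivity of Counter values
theorem counter_pos_step (d : PySem.Dict Int Int) (v : Int)
    (hd : ∀ x ∈ d.items, 0 < x.2) :
    ∀ x ∈ (PySem.Dict.modify d v 0 (· + 1)).items, 0 < x.2 := by
  intro x hx
  have hmod : PySem.Dict.modify d v 0 (· + 1) = d.insert v (d.getD v 0 + 1) := rfl
  rw [hmod] at hx
  rcases (PySem.Dict.mem_items_insert d v _ x).mp hx with rfl | ⟨hmem, _⟩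
  · have hge : 0 ≤ d.getD v 0 := by
      cases hg : d.get? v with
      | none => rw [PySem.Dict.getD_eq_get?_getD, hg]; simp
      | some y =>
        rw [PySem.Dict.getD_eq_get?_getD, hg, Option.getD_some]
        exact le_of_lt (hd (v, y) (PySem.Dict.mem_items_of_get?_eq_some d hg))
    simp only []
    omega
  · exact hd x hmem

theorem counter_pos_list (l : List Int) :
    ∀ (d : PySem.Dict Int Int), (∀ x ∈ d.items, 0 < x.2) →
    ∀ x ∈ (l.foldl (fun d v => PySem.Dict.modify d v 0 (· + 1)) d).items, 0 < x.2 := by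
  induction l with
  | nil => intro d hd; exact hd
  | cons v l ihl =>
    intro d hd
    exact ihl _ (counter_pos_step d v hd)

-- the two barrier-selection folds
theorem barrier_fold_none : ∀ (items : List (Int × Int)),
    items.filter (fun p => decide (p.1 ≠ 0)) = [] →
    ∀ acc : Option Int × Int,
    items.foldl (fun best p => if p.1 ≠ 0 ∧ best.2 < p.2 then (some p.1, p.2) else best) acc
      = acc := by
  intro items
  induction items with
  | nil => intro _ acc; rfl
  | cons p items ihp =>
    intro hf acc
    by_cases hp : p.1 = 0
    · have hfil : (p :: items).filter (fun p => decide (p.1 ≠ 0))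
          = items.filter (fun p => decide (p.1 ≠ 0)) := by
        rw [List.filter_cons]
        have hfp : decide (p.1 ≠ 0) = false := by simp [hp]
        rw [hfp, if_neg (by simp)]
      rw [hfil] at hf
      rw [List.foldl_cons, if_neg (by intro hc; exact hc.1 hp)]
      exact ihp hf acc
    · have hfil : (p :: items).filter (fun p => decide (p.1 ≠ 0))
          = p :: items.filter (fun p => decide (p.1 ≠ 0)) := by
        rw [List.filter_cons]
        have hfp : decide (p.1 ≠ 0) = true := by simp [hp]
        rw [hfp, if_pos rfl]
      rw [hfil] at hf
      cases hf

theorem barrier_fold_some : ∀ (items : List (Int × Int)) (b : Int × Int),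
    items.foldl (fun best p => if p.1 ≠ 0 ∧ best.2 < p.2 then (some p.1, p.2) else best)
        (some b.1, b.2)
      = (some ((items.filter (fun p => decide (p.1 ≠ 0))).foldl
          (fun best x => if best.2 < x.2 then x else best) b).1,
        ((items.filter (fun p => decide (p.1 ≠ 0))).foldl
          (fun best x => if best.2 < x.2 then x else best) b).2) := by
  intro items
  induction items with
  | nil => intro b; rfl
  | cons p items ihp =>
    intro b
    by_cases hp : p.1 = 0
    · have hfil : (p :: items).filter (fun p => decide (p.1 ≠ 0))
          = items.filter (fun p => decide (p.1 ≠ 0)) := by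
        rw [List.filter_cons]
        have hfp : decide (p.1 ≠ 0) = false := by simp [hp]
        rw [hfp, if_neg (by simp)]
      rw [hfil, List.foldl_cons, if_neg (by intro hc; exact hc.1 hp)]
      exact ihp b
    · have hfil : (p :: items).filter (fun p => decide (p.1 ≠ 0))
          = p :: items.filter (fun p => decide (p.1 ≠ 0)) := by
        rw [List.filter_cons]
        have hfp : decide (p.1 ≠ 0) = true := by simp [hp]
        rw [hfp, if_pos rfl]
      rw [hfil, List.foldl_cons, List.foldl_cons]
      by_cases hlt : b.2 < p.2
      · rw [if_pos ⟨hp, hlt⟩, if_pos hlt]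
        exact ihp p
      · rw [if_neg (by intro hc; exact hlt hc.2), if_neg hlt]
        exact ihp b

theorem barrier_fold_entry : ∀ (items : List (Int × Int)),
    (∀ x ∈ items, 0 < x.2) →
    ∀ (c0 : Int × Int) (cs : List (Int × Int)),
    items.filter (fun p => decide (p.1 ≠ 0)) = c0 :: cs →
    items.foldl (fun best p => if p.1 ≠ 0 ∧ best.2 < p.2 then (some p.1, p.2) else best)
        (none, -1)
      = (some (cs.foldl (fun best x => if best.2 < x.2 then x else best) c0).1,
         (cs.foldl (fun best x => if best.2 < x.2 then x else best) c0).2) := by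
  intro items
  induction items with
  | nil => intro _ c0 cs hf; cases hf
  | cons p items ihp =>
    intro hpos c0 cs hf
    by_cases hp : p.1 = 0
    · have hfil : (p :: items).filter (fun p => decide (p.1 ≠ 0))
          = items.filter (fun p => decide (p.1 ≠ 0)) := by
        rw [List.filter_cons]
        have hfp : decide (p.1 ≠ 0) = false := by simp [hp]
        rw [hfp, if_neg (by simp)]
      rw [hfil] at hf
      rw [List.foldl_cons, if_neg (by intro hc; exact hc.1 hp)]
      exact ihp (fun x hx => hpos x (List.mem_cons_of_mem _ hx)) c0 cs hf
    · have hfil : (p :: items).filter (fun p => decide (p.1 ≠ 0))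
          = p :: items.filter (fun p => decide (p.1 ≠ 0)) := by
        rw [List.filter_cons]
        have hfp : decide (p.1 ≠ 0) = true := by simp [hp]
        rw [hfp, if_pos rfl]
      rw [hfil] at hf
      obtain ⟨rfl, rfl⟩ := List.cons.inj hf
      rw [List.foldl_cons, if_pos ⟨hp, by
        have := hpos p List.mem_cons_self
        simp only []
        omega⟩]
      exact barrier_fold_some items p

theorem foldl_congr_mem' {α β : Type} (l : List α) (f g : β → α → β) :
    (∀ b : β, ∀ a ∈ l, f b a = g b a) → ∀ init : β, l.foldl f init = l.foldl g init := by
  induction l with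
  | nil => intro _ init; rfl
  | cons a l ihl =>
    intro hfg init
    rw [List.foldl_cons, List.foldl_cons, hfg init a List.mem_cons_self]
    exact ihl (fun b a' ha' => hfg b a' (List.mem_cons_of_mem _ ha')) _

theorem counts_pos (k : Nat) : ∀ (rows' : List (List Int)) (d : PySem.Dict Int Int),
    (∀ x ∈ d.items, 0 < x.2) →
    ∀ x ∈ (rows'.foldl (fun d row => (row.take k).foldl
      (fun (d : PySem.Dict Int Int) v => PySem.Dict.modify d v 0 (· + 1)) d) d).items,
      0 < x.2 := by
  intro rows'
  induction rows' with
  | nil => intro d hd; exact hd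
  | cons row rows' ihr =>
    intro d hd
    exact ihr _ (counter_pos_list (row.take k) d hd)


-- ===== row-major index bookkeeping =====
def idxW (w : Int) (p : Int × Int) : Int := p.1 * w + p.2

theorem idxW_bounds {h w : Int} {p : Int × Int} (hin : InB h w p) :
    0 ≤ idxW w p ∧ idxW w p < h * w := by
  obtain ⟨h1, h2, h3, h4⟩ := hin
  have hw : 0 < w := by omega
  constructor
  · have := mul_nonneg h1 (le_of_lt hw)
    unfold idxW; omega
  · have hle : (p.1 + 1) * w ≤ h * w := mul_le_mul_of_nonneg_right (by omega) (le_of_lt hw)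
    unfold idxW; nlinarith

theorem idxW_inj {h w : Int} {p q : Int × Int} (hp : InB h w p) (hq : InB h w q)
    (he : idxW w p = idxW w q) : p = q := by
  obtain ⟨hp1, hp2, hp3, hp4⟩ := hp
  obtain ⟨hq1, hq2, hq3, hq4⟩ := hq
  have hw : 0 < w := by omega
  have h1 : p.1 = q.1 := by
    rcases lt_trichotomy p.1 q.1 with hlt | heq | hgt
    · have : (p.1 + 1) * w ≤ q.1 * w := mul_le_mul_of_nonneg_right (by omega) (le_of_lt hw)
      unfold idxW at he; nlinarith
    · exact heq
    · have : (q.1 + 1) * w ≤ p.1 * w := mul_le_mul_of_nonneg_right (by omega) (le_of_lt hw)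
      unfold idxW at he; nlinarith
  have h2 : p.2 = q.2 := by unfold idxW at he; rw [h1] at he; omega
  exact Prod.ext h1 h2

theorem floordiv_idxW {h w : Int} {p : Int × Int} (hin : InB h w p) :
    PySem.Int.floordiv (idxW w p) w = p.1 ∧ PySem.Int.mod (idxW w p) w = p.2 := by
  obtain ⟨h1, h2, h3, h4⟩ := hin
  have hw : 0 < w := by omega
  rw [PySem.Int.floordiv_eq_ediv_of_pos hw, PySem.Int.mod_eq_emod_of_pos hw]
  unfold idxW
  constructor
  · rw [add_comm, Int.add_mul_ediv_right _ _ (by omega : w ≠ 0),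
      Int.ediv_eq_zero_of_lt h3 h4, zero_add]
  · rw [add_comm, Int.add_mul_emod_self_right, Int.emod_eq_of_lt h3 h4]

theorem cell_of_idx {h w : Int} (hw : 0 < w) {i : Int} (h0 : 0 ≤ i) (hi : i < h * w) :
    InB h w (PySem.Int.floordiv i w, PySem.Int.mod i w) ∧
      idxW w (PySem.Int.floordiv i w, PySem.Int.mod i w) = i := by
  rw [PySem.Int.floordiv_eq_ediv_of_pos hw, PySem.Int.mod_eq_emod_of_pos hw]
  have hm0 : 0 ≤ i % w := Int.emod_nonneg i (by omega)
  have hmw : i % w < w := Int.emod_lt_of_pos i hw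
  have hd0 : 0 ≤ i / w := Int.ediv_nonneg h0 (le_of_lt hw)
  have hdh : i / w < h := by
    rw [Int.ediv_lt_iff_lt_mul hw]; omega
  have hiw : i / w * w + i % w = i := by
    have := Int.emod_add_ediv i w
    nlinarith [Int.emod_add_ediv i w]
  exact ⟨⟨hd0, hdh, hm0, hmw⟩, hiw⟩

theorem cellList_pairwise (h w : Int) :
    (cellList h w).Pairwise (fun p q => idxW w p < idxW w q) := by
  unfold cellList
  rw [List.pairwise_flatMap]
  constructor
  · intro r hr
    rw [List.pairwise_map]
    refine (PySem.List.pairwise_lt_pyRange_one 0 w).imp ?_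
    intro c c' hlt
    unfold idxW; simp only; omega
  · have := PySem.List.pairwise_lt_pyRange_one 0 h
    refine this.imp ?_
    intro r r' hlt x hx y hy
    rw [List.mem_map] at hx hy
    obtain ⟨c, hc, rfl⟩ := hx
    obtain ⟨c', hc', rfl⟩ := hy
    rw [PySem.List.mem_pyRange_one] at hc hc'
    have hw : 0 < w := by omega
    have : (r + 1) * w ≤ r' * w := mul_le_mul_of_nonneg_right (by omega) (le_of_lt hw)
    unfold idxW; simp only; nlinarith

-- ===== A's scan characterised by ghost components (seed, popped-cell list) =====
theorem seed_specA (g : List (List Int)) (h w barrier nid : Int)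
    (vis : List (List Bool)) (cid : List (List Int))
    (hdv : Dims2 vis h w) (hdc : Dims2 cid h w)
    (r c : Int) (hin : InB h w (r, c)) (hok : OkC g h w barrier (r, c))
    (hunm : vGet vis r c = false)
    (hclosedAll : ∀ p, InB h w p → vGet vis p.1 p.2 = true →
      ∀ n, StepC g h w barrier p n → vGet vis n.1 n.2 = true) :
    ∃ pl : List (Int × Int),
      pl.Nodup ∧
      (∀ p : Int × Int, p ∈ pl ↔ ReachC g h w barrier (r, c) p) ∧
      Dims2 (bfsLoop g h w barrier nid (h.toNat * w.toNat + 1) [(r, c)] (vSet vis r c)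
        (mSet cid r c nid) 0 r c).1 h w ∧
      Dims2 (bfsLoop g h w barrier nid (h.toNat * w.toNat + 1) [(r, c)] (vSet vis r c)
        (mSet cid r c nid) 0 r c).2.1 h w ∧
      (∀ r' c' : Int, InB h w (r', c') →
        ((vGet (bfsLoop g h w barrier nid (h.toNat * w.toNat + 1) [(r, c)] (vSet vis r c)
            (mSet cid r c nid) 0 r c).1 r' c' = true) ↔
          (vGet vis r' c' = true ∨ ReachC g h w barrier (r, c) (r', c')))) ∧
      (∀ r' c' : Int, InB h w (r', c') →
        (ReachC g h w barrier (r, c) (r', c') →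
          mGet (bfsLoop g h w barrier nid (h.toNat * w.toNat + 1) [(r, c)] (vSet vis r c)
            (mSet cid r c nid) 0 r c).2.1 r' c' = nid) ∧
        (¬ReachC g h w barrier (r, c) (r', c') →
          mGet (bfsLoop g h w barrier nid (h.toNat * w.toNat + 1) [(r, c)] (vSet vis r c)
            (mSet cid r c nid) 0 r c).2.1 r' c' = mGet cid r' c')) ∧
      (bfsLoop g h w barrier nid (h.toNat * w.toNat + 1) [(r, c)] (vSet vis r c)
        (mSet cid r c nid) 0 r c).2.2.1 = (pl.length : Int) ∧
      (bfsLoop g h w barrier nid (h.toNat * w.toNat + 1) [(r, c)] (vSet vis r c)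
        (mSet cid r c nid) 0 r c).2.2.2.1 =
        pl.foldl (fun m p => if p.1 < m then p.1 else m) r ∧
      (bfsLoop g h w barrier nid (h.toNat * w.toNat + 1) [(r, c)] (vSet vis r c)
        (mSet cid r c nid) 0 r c).2.2.2.2 =
        pl.foldl (fun m p => if p.2 < m then p.2 else m) c := by
  have hdv1 : Dims2 (vSet vis r c) h w := dims2_vSet hdv hin
  have hdc1 : Dims2 (mSet cid r c nid) h w := dims2_mSet hdc hin
  have hseedmk : vGet (vSet vis r c) r c = true := by
    rw [vGet_vSet hdv hin hin, if_pos ⟨rfl, rfl⟩]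
  have hvis1 : ∀ r' c' : Int, InB h w (r', c') →
      vGet (vSet vis r c) r' c' = if r' = r ∧ c' = c then true else vGet vis r' c' :=
    fun r' c' hin' => vGet_vSet hdv hin hin'
  have hqm1 : ∀ p ∈ [((r : Int), (c : Int))], InB h w p ∧ vGet (vSet vis r c) p.1 p.2 = true ∧
      OkC g h w barrier p := by
    intro p hp
    rw [List.mem_singleton] at hp
    subst hp
    exact ⟨hin, hseedmk, hok⟩
  have hclosed1 : ∀ p, InB h w p → vGet (vSet vis r c) p.1 p.2 = true →
      p ∉ [((r : Int), (c : Int))] → ∀ n, StepC g h w barrier p n →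
      vGet (vSet vis r c) n.1 n.2 = true := by
    intro p hinp hmk hnot n hstep
    have hne : ¬(p.1 = r ∧ p.2 = c) := by
      intro hh
      apply hnot
      rw [List.mem_singleton]
      obtain ⟨p1, p2⟩ := p
      simp_all
    rw [hvis1 p.1 p.2 hinp, if_neg hne] at hmk
    have := hclosedAll p hinp hmk n hstep
    rw [hvis1 n.1 n.2 hstep.2.1.1]
    split
    · rfl
    · exact this
  have hfuel1 : countFalse (vSet vis r c) + ([((r : Int), (c : Int))]).length ≤
      h.toNat * w.toNat + 1 := by
    have h1 := countFalse_vSet hdv hin hunm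
    have h2 := countFalse_le hdv
    simp only [List.length_singleton]
    omega
  obtain ⟨plA, hplAnd, hplAmem, hdvA, hdcA, hvgetA, hmgetA, hsizeA, hminrA, hmincA⟩ :=
    bfsLoop_spec g h w barrier nid (h.toNat * w.toNat + 1) [(r, c)] (vSet vis r c)
      (mSet cid r c nid) 0 r c (dims2_vSet hdv hin) hdc1 (List.nodup_singleton _) hqm1
      hclosed1 hfuel1
  have hreach_unm : ∀ p : Int × Int, ReachC g h w barrier (r, c) p → p ≠ (r, c) →
      vGet vis p.1 p.2 = false := by
    intro p hr hne
    cases hv : vGet vis p.1 p.2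
    · rfl
    · have := reach_marked hclosedAll (reachC_symm hr) hv
      rw [hunm] at this
      exact Bool.noConfusion this
  have hRs : ∀ p : Int × Int, RSet g h w barrier [((r : Int), (c : Int))] p ↔
      ReachC g h w barrier (r, c) p := by
    intro p
    constructor
    · rintro ⟨s, hs, hpath⟩
      rw [List.mem_singleton] at hs
      exact hs ▸ hpath
    · intro hr
      exact ⟨(r, c), List.mem_singleton_self _, hr⟩
  have hmemA : ∀ p : Int × Int, p ∈ plA ↔ ReachC g h w barrier (r, c) p := by
    intro p
    rw [hplAmem p]
    constructor
    · rintro (hp | ⟨_, _, hR⟩)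
      · rw [List.mem_singleton] at hp
        exact hp ▸ Relation.ReflTransGen.refl
      · exact (hRs p).mp hR
    · intro hr
      by_cases hne : p = (r, c)
      · exact Or.inl (by rw [hne]; exact List.mem_singleton_self _)
      · have hokp : OkC g h w barrier p := reachC_ok hr (fun he => hne he.symm)
        refine Or.inr ⟨hokp.1, ?_, (hRs p).mpr hr⟩
        rw [hvis1 p.1 p.2 hokp.1, if_neg (fun hh => hne (Prod.ext hh.1 hh.2))]
        exact hreach_unm p hr hne
  refine ⟨plA, hplAnd, hmemA, hdvA, hdcA, ?_, ?_, ?_, hminrA, hmincA⟩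
  · intro r' c' hin'
    rw [hvgetA r' c' hin', hvis1 r' c' hin', hRs]
    by_cases hrc : r' = r ∧ c' = c
    · rw [if_pos hrc]
      have hpe : ((r', c') : Int × Int) = (r, c) := Prod.ext hrc.1 hrc.2
      exact ⟨fun _ => Or.inr (by rw [hpe]; exact Relation.ReflTransGen.refl), fun _ => Or.inl rfl⟩
    · rw [if_neg hrc]
  · intro r' c' hin'
    obtain ⟨hset, hkeep⟩ := hmgetA r' c' hin'
    constructor
    · intro hr
      by_cases hrc : ((r', c') : Int × Int) = (r, c)
      · rw [hkeep (Or.inr (by rw [hrc]; exact List.mem_singleton_self _))]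
        rw [mGet_mSet hdc hin hin',
          if_pos ⟨congrArg Prod.fst hrc, congrArg Prod.snd hrc⟩]
      · refine hset ⟨(hmemA _).mpr hr, ?_⟩
        rw [List.mem_singleton]
        exact hrc
    · intro hnr
      have hnpl : ((r', c') : Int × Int) ∉ plA := fun hh => hnr ((hmemA _).mp hh)
      rw [hkeep (Or.inl hnpl), mGet_mSet hdc hin hin', if_neg (by
        intro hh
        apply hnr
        rw [(Prod.ext hh.1 hh.2 : ((r', c') : Int × Int) = (r, c))]
        exact Relation.ReflTransGen.refl)]
  · rw [hsizeA]; omega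


-- the outer-loop step function (the body of A's row-major scan)
def stepA (g : List (List Int)) (h w barrier : Int)
    (st : List (List Bool) × List (List Int) × List (Int × Int × Int × Int) × Int)
    (rc : Int × Int) :
    List (List Bool) × List (List Int) × List (Int × Int × Int × Int) × Int :=
  if cellAt g rc.1 rc.2 = barrier ∨ vGet st.1 rc.1 rc.2 = true then st
  else
    let vis := vSet st.1 rc.1 rc.2
    let cid := mSet st.2.1 rc.1 rc.2 st.2.2.2
    let res := bfsLoop g h w barrier st.2.2.2 (h.toNat * w.toNat + 1) [(rc.1, rc.2)] vis cid
      0 rc.1 rc.2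
    (res.1, res.2.1, st.2.2.1 ++ [(st.2.2.2, res.2.2.1, res.2.2.2.1, res.2.2.2.2)],
     st.2.2.2 + 1)

-- A's stored comps entries as determined by the ghost (seed, cells) list
def enumA : Nat → List ((Int × Int) × List (Int × Int)) → List (Int × Int × Int × Int)
  | _, [] => []
  | n, sc :: l =>
    ((n : Int), (sc.2.length : Int),
      sc.2.foldl (fun m p => if p.1 < m then p.1 else m) sc.1.1,
      sc.2.foldl (fun m p => if p.2 < m then p.2 else m) sc.1.2) :: enumA (n + 1) l

theorem enumA_append_singleton (b : (Int × Int) × List (Int × Int)) :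
    ∀ (l : List ((Int × Int) × List (Int × Int))) (n : Nat),
    enumA n (l ++ [b]) = enumA n l ++
      [(((n + l.length : Nat) : Int), (b.2.length : Int),
        b.2.foldl (fun m p => if p.1 < m then p.1 else m) b.1.1,
        b.2.foldl (fun m p => if p.2 < m then p.2 else m) b.1.2)] := by
  intro l
  induction l with
  | nil => intro n; simp [enumA]
  | cons a l ih =>
    intro n
    simp only [List.cons_append, enumA, ih (n + 1), List.length_cons]
    have : n + 1 + l.length = n + (l.length + 1) := by omega
    rw [this]

-- invariant of A's row-major scan, over the processed prefix pre
def OuterInvA (g : List (List Int)) (h w barrier : Int) (pre : List (Int × Int))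
    (vis : List (List Bool)) (cid : List (List Int))
    (comps : List ((Int × Int) × List (Int × Int))) : Prop :=
  Dims2 vis h w ∧ Dims2 cid h w ∧
  (∀ (i : Nat) sc, comps[i]? = some sc →
    OkC g h w barrier sc.1 ∧ sc.2.Nodup ∧
    (∀ p : Int × Int, p ∈ sc.2 ↔ ReachC g h w barrier sc.1 p) ∧
    (∀ r c : Int, InB h w (r, c) → (((r, c) : Int × Int) ∈ sc.2 ↔ mGet cid r c = (i : Int))) ∧
    (∀ p ∈ sc.2, idxW w sc.1 ≤ idxW w p)) ∧
  (∀ r c : Int, InB h w (r, c) →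
    (vGet vis r c = true ↔ ∃ sc ∈ comps, ((r, c) : Int × Int) ∈ sc.2)) ∧
  (∀ r c : Int, InB h w (r, c) → mGet cid r c < (comps.length : Int)) ∧
  (∀ p ∈ pre, OkC g h w barrier p → vGet vis p.1 p.2 = true) ∧
  (∀ sc ∈ comps, sc.1 ∈ pre) ∧
  comps.Pairwise (fun a b => idxW w a.1 < idxW w b.1)

theorem outerInvA_closed {g : List (List Int)} {h w barrier : Int} {pre : List (Int × Int)}
    {vis : List (List Bool)} {cid : List (List Int)}
    {comps : List ((Int × Int) × List (Int × Int))}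
    (hinv : OuterInvA g h w barrier pre vis cid comps) :
    ∀ p, InB h w p → vGet vis p.1 p.2 = true →
      ∀ n, StepC g h w barrier p n → vGet vis n.1 n.2 = true := by
  obtain ⟨_, _, hcomp, hmk, _⟩ := hinv
  intro p hin hv n hstep
  obtain ⟨cb, hcbmem, hpcb⟩ := (hmk p.1 p.2 hin).mp hv
  obtain ⟨i, hi, hcbi⟩ := List.getElem_of_mem hcbmem
  obtain ⟨_, _, hsmem, _, _⟩ := hcomp i cb (by rw [List.getElem?_eq_getElem hi, hcbi])
  have h1 : ReachC g h w barrier cb.1 p := (hsmem p).mp hpcb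
  have h2 : ReachC g h w barrier cb.1 n := h1.tail hstep
  exact (hmk n.1 n.2 hstep.2.1.1).mpr ⟨cb, hcbmem, (hsmem n).mpr h2⟩

theorem outer_specA (g : List (List Int)) (h w barrier : Int) :
    ∀ (cl pre : List (Int × Int)) (vis : List (List Bool)) (cid : List (List Int))
      (comps : List ((Int × Int) × List (Int × Int))),
    pre ++ cl = cellList h w →
    OuterInvA g h w barrier pre vis cid comps →
    ∃ vis' cid' comps',
      cl.foldl (stepA g h w barrier) (vis, cid, enumA 0 comps, (comps.length : Int))
        = (vis', cid', enumA 0 comps', (comps'.length : Int)) ∧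
      OuterInvA g h w barrier (pre ++ cl) vis' cid' comps' := by
  intro cl
  induction cl with
  | nil =>
    intro pre vis cid comps _ hinv
    exact ⟨vis, cid, comps, rfl, by simpa using hinv⟩
  | cons p cl ih =>
    intro pre vis cid comps hsplit hinv
    obtain ⟨hdv, hdc, hcomp, hmk, hbound, hcov, hseedpre, hseedinc⟩ := hinv
    have hpmem : p ∈ cellList h w := by
      rw [← hsplit]; exact List.mem_append.mpr (Or.inr List.mem_cons_self)
    have hinB : InB h w p := mem_cellList.mp hpmem
    have hpw : (cellList h w).Pairwise (fun a b => idxW w a < idxW w b) := cellList_pairwise h w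
    have hpw' := hsplit ▸ hpw
    have hprelt : ∀ a ∈ pre, idxW w a < idxW w p := by
      intro a ha
      exact (List.pairwise_append.mp hpw').2.2 a ha p List.mem_cons_self
    have hcllt : ∀ q ∈ cl, idxW w p < idxW w q := by
      intro q hq
      have := (List.pairwise_append.mp hpw').2.1
      exact (List.pairwise_cons.mp this).1 q hq
    have hsplit' : (pre ++ [p]) ++ cl = cellList h w := by
      rw [List.append_assoc]; simpa using hsplit
    by_cases hskip : cellAt g p.1 p.2 = barrier ∨ vGet vis p.1 p.2 = true
    · have hAeq : stepA g h w barrier (vis, cid, enumA 0 comps, (comps.length : Int)) p =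
          (vis, cid, enumA 0 comps, (comps.length : Int)) := by
        unfold stepA; rw [if_pos hskip]
      rw [List.foldl_cons, hAeq]
      have hinv' : OuterInvA g h w barrier (pre ++ [p]) vis cid comps := by
        refine ⟨hdv, hdc, hcomp, hmk, hbound, ?_, ?_, hseedinc⟩
        · intro q hq hqok
          rcases List.mem_append.mp hq with hq | hq
          · exact hcov q hq hqok
          · rw [List.mem_singleton] at hq
            subst hq
            rcases hskip with hbar | hvv
            · exact absurd hbar hqok.2
            · exact hvv
        · intro sc hsc
          exact List.mem_append.mpr (Or.inl (hseedpre sc hsc))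
      obtain ⟨vis', cid', comps', he, hinv''⟩ := ih (pre ++ [p]) vis cid comps hsplit' hinv'
      refine ⟨vis', cid', comps', he, ?_⟩
      rw [List.append_assoc] at hinv''
      simpa using hinv''
    · have hbar : cellAt g p.1 p.2 ≠ barrier := fun hh => hskip (Or.inl hh)
      have hunm : vGet vis p.1 p.2 = false := by
        cases hv : vGet vis p.1 p.2
        · rfl
        · exact absurd (Or.inr hv) hskip
      have hok : OkC g h w barrier (p.1, p.2) := ⟨hinB, hbar⟩
      obtain ⟨pl, hplnd, hplmem, hdv', hdc', hvget', hmget', hsize', hminr', hminc'⟩ :=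
        seed_specA g h w barrier (comps.length : Int) vis cid hdv hdc p.1 p.2 hinB hok hunm
          (outerInvA_closed ⟨hdv, hdc, hcomp, hmk, hbound, hcov, hseedpre, hseedinc⟩)
      set res := bfsLoop g h w barrier (comps.length : Int) (h.toNat * w.toNat + 1)
        [(p.1, p.2)] (vSet vis p.1 p.2) (mSet cid p.1 p.2 (comps.length : Int)) 0 p.1 p.2
        with hres
      -- the seed is the row-major minimum of its component
      have hseedmin : ∀ q ∈ pl, idxW w p ≤ idxW w q := by
        intro q hq
        have hrq : ReachC g h w barrier (p.1, p.2) q := (hplmem q).mp hq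
        by_contra hlt
        push_neg at hlt
        have hqne : q ≠ p := by
          intro he; rw [he] at hlt; omega
        have hqok : OkC g h w barrier q := reachC_ok hrq (fun he => hqne he.symm)
        have hqcell : q ∈ cellList h w := mem_cellList.mpr hqok.1
        have hqpre : q ∈ pre := by
          rw [← hsplit] at hqcell
          rcases List.mem_append.mp hqcell with hq1 | hq1
          · exact hq1
          · rcases List.mem_cons.mp hq1 with rfl | hq1
            · exact absurd rfl hqne
            · exact absurd (hcllt q hq1) (by omega)
        have hqvis : vGet vis q.1 q.2 = true := hcov q hqpre hqok
        obtain ⟨sc, hscmem, hqsc⟩ := (hmk q.1 q.2 hqok.1).mp hqvis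
        obtain ⟨i, hi, hsci⟩ := List.getElem_of_mem hscmem
        obtain ⟨_, _, hsmem, _, _⟩ := hcomp i sc (by rw [List.getElem?_eq_getElem hi, hsci])
        have h1 : ReachC g h w barrier sc.1 q := (hsmem q).mp (by simpa using hqsc)
        have h2 : ReachC g h w barrier sc.1 (p.1, p.2) := h1.trans (reachC_symm hrq)
        have h3 : ((p.1, p.2) : Int × Int) ∈ sc.2 := (hsmem _).mpr h2
        have h4 : vGet vis p.1 p.2 = true := (hmk p.1 p.2 hinB).mpr ⟨sc, hscmem, h3⟩
        rw [hunm] at h4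
        exact Bool.noConfusion h4
      set newc : (Int × Int) × List (Int × Int) := ((p.1, p.2), pl) with hnewc
      have hAeq : stepA g h w barrier (vis, cid, enumA 0 comps, (comps.length : Int)) p =
          (res.1, res.2.1, enumA 0 (comps ++ [newc]), ((comps ++ [newc]).length : Int)) := by
        unfold stepA
        rw [if_neg hskip]
        refine congrArg₂ _ rfl (congrArg₂ _ rfl (congrArg₂ _ ?_ ?_))
        · rw [hsize', hminr', hminc', enumA_append_singleton]
          simp only [Nat.zero_add, hnewc]
        · simp only [List.length_append, List.length_cons, List.length_nil]
          push_cast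
          ring
      rw [List.foldl_cons, hAeq]
      -- the new invariant
      have hinv' : OuterInvA g h w barrier (pre ++ [p]) res.1 res.2.1 (comps ++ [newc]) := by
        refine ⟨hdv', hdc', ?_, ?_, ?_, ?_, ?_, ?_⟩
        · intro i sc hsc
          by_cases hi : i < comps.length
          · have hsc' : comps[i]? = some sc := by
              rwa [List.getElem?_append_left hi] at hsc
            obtain ⟨hoks, hnd, hsmem, hcidiff, hmin⟩ := hcomp i sc hsc'
            refine ⟨hoks, hnd, hsmem, ?_, hmin⟩
            intro r c hin'
            by_cases hre : ReachC g h w barrier (p.1, p.2) (r, c)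
            · have hnm : ((r, c) : Int × Int) ∉ sc.2 := by
                intro hmem
                have h1 := (hsmem _).mp hmem
                have h2 : ReachC g h w barrier sc.1 (p.1, p.2) := h1.trans (reachC_symm hre)
                have h3 : ((p.1, p.2) : Int × Int) ∈ sc.2 := (hsmem _).mpr h2
                have h4 : vGet vis p.1 p.2 = true :=
                  (hmk p.1 p.2 hinB).mpr ⟨sc, List.mem_of_getElem? hsc', h3⟩
                rw [hunm] at h4
                exact Bool.noConfusion h4
              have h5 := (hmget' r c hin').1 hre
              constructor
              · intro hmem; exact absurd hmem hnm
              · intro heq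
                rw [h5] at heq
                exfalso
                omega
            · rw [(hmget' r c hin').2 hre]
              exact hcidiff r c hin'
          · by_cases hi2 : i = comps.length
            · subst hi2
              rw [List.getElem?_concat_length] at hsc
              obtain rfl : newc = sc := Option.some.inj hsc
              refine ⟨hok, hplnd, hplmem, ?_, hseedmin⟩
              intro r c hin'
              constructor
              · intro hmem
                exact (hmget' r c hin').1 ((hplmem _).mp hmem)
              · intro heq
                by_cases hre : ReachC g h w barrier (p.1, p.2) (r, c)
                · exact (hplmem _).mpr hre
                · rw [(hmget' r c hin').2 hre] at heq
                  have := hbound r c hin'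
                  omega
            · exfalso
              have hge : (comps ++ [newc]).length ≤ i := by
                simp only [List.length_append, List.length_cons, List.length_nil]
                omega
              rw [List.getElem?_eq_none hge] at hsc
              cases hsc
        · intro r c hin'
          rw [hvget' r c hin']
          constructor
          · rintro (hv | hre)
            · obtain ⟨sc, hscm, hm⟩ := (hmk r c hin').mp hv
              exact ⟨sc, List.mem_append.mpr (Or.inl hscm), hm⟩
            · exact ⟨newc, List.mem_append.mpr (Or.inr (List.mem_singleton_self _)),
                (hplmem _).mpr hre⟩
          · rintro ⟨sc, hscm, hm⟩
            rcases List.mem_append.mp hscm with hold | hnew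
            · exact Or.inl ((hmk r c hin').mpr ⟨sc, hold, hm⟩)
            · rw [List.mem_singleton] at hnew
              subst hnew
              exact Or.inr ((hplmem _).mp hm)
        · intro r c hin'
          simp only [List.length_append, List.length_cons, List.length_nil]
          by_cases hre : ReachC g h w barrier (p.1, p.2) (r, c)
          · rw [(hmget' r c hin').1 hre]
            push_cast
            omega
          · rw [(hmget' r c hin').2 hre]
            have := hbound r c hin'
            push_cast
            omega
        · intro q hq hqok
          rcases List.mem_append.mp hq with hq1 | hq1
          · have := hcov q hq1 hqok
            exact (hvget' q.1 q.2 hqok.1).mpr (Or.inl this)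
          · rw [List.mem_singleton] at hq1
            subst hq1
            exact (hvget' q.1 q.2 hqok.1).mpr (Or.inr Relation.ReflTransGen.refl)
        · intro sc hsc
          rcases List.mem_append.mp hsc with hsc1 | hsc1
          · exact List.mem_append.mpr (Or.inl (hseedpre sc hsc1))
          · rw [List.mem_singleton] at hsc1
            subst hsc1
            exact List.mem_append.mpr (Or.inr (by simp [hnewc]))
        · rw [List.pairwise_append]
          refine ⟨hseedinc, List.pairwise_singleton _ _, ?_⟩
          intro a ha b hb
          rw [List.mem_singleton] at hb
          subst hb
          have := hprelt a.1 (hseedpre a ha)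
          simpa [hnewc] using this
      obtain ⟨vis', cid', comps', he, hinv''⟩ :=
        ih (pre ++ [p]) res.1 res.2.1 (comps ++ [newc]) hsplit' hinv'
      refine ⟨vis', cid', comps', he, ?_⟩
      rw [List.append_assoc] at hinv''
      simpa using hinv''


-- ===== B-side: min-label propagation =====
def pOfW (w i : Int) : Int × Int := (PySem.Int.floordiv i w, PySem.Int.mod i w)

-- invariant of the label matrix through the sweeps
def LabInv (g : List (List Int)) (h w barrier : Int) (lab : List Int) : Prop :=
  lab.length = h.toNat * w.toNat ∧
  ∀ i : Nat, ∀ hi : i < lab.length,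
    (¬ OkC g h w barrier (pOfW w (i : Int)) → lab[i] = -1) ∧
    (OkC g h w barrier (pOfW w (i : Int)) →
      ∃ q, ReachC g h w barrier (pOfW w (i : Int)) q ∧ InB h w q ∧
        lab[i] = idxW w q ∧ lab[i] ≤ (i : Int))

theorem labGet_eq_getElem {lab : List Int} {i : Nat} (hi : i < lab.length) :
    labGet lab (i : Int) = lab[i] := by
  unfold labGet
  rw [Int.toNat_natCast, List.getD_eq_getElem _ _ hi]

theorem hw_toNat {h w : Int} (hh : 0 < h) (hw : 0 < w) :
    ((h.toNat * w.toNat : Nat) : Int) = h * w := by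
  push_cast
  rw [Int.toNat_of_nonneg (by omega), Int.toNat_of_nonneg (by omega)]

theorem labGet_nonneg_ok {g : List (List Int)} {h w barrier : Int} {lab : List Int}
    (hinv : LabInv g h w barrier lab) (hh : 0 < h) (hw : 0 < w) {j : Int}
    (h0 : 0 ≤ j) (hj : j < h * w) (hnn : 0 ≤ labGet lab j) :
    OkC g h w barrier (pOfW w j) := by
  obtain ⟨hlen, hinv⟩ := hinv
  have hjn : j.toNat < lab.length := by
    rw [hlen]
    have := hw_toNat hh hw
    omega
  have hje : ((j.toNat : Nat) : Int) = j := Int.toNat_of_nonneg h0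
  by_contra hok
  have := (hinv j.toNat hjn).1 (by rwa [hje])
  rw [show labGet lab j = lab[j.toNat] from by
    unfold labGet; rw [List.getD_eq_getElem _ _ hjn]] at hnn
  omega

-- the four neighbour shifts in flat coordinates
theorem shift_up {h w : Int} {q : Int × Int} (hq : InB h w q) (h1 : 0 < q.1) :
    InB h w (q.1 - 1, q.2) ∧ idxW w (q.1 - 1, q.2) = idxW w q - w ∧
      AdjC q (q.1 - 1, q.2) := by
  obtain ⟨a1, a2, a3, a4⟩ := hq
  refine ⟨⟨by omega, by omega, a3, a4⟩, ?_, Or.inl rfl⟩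
  unfold idxW; simp only; ring

theorem shift_down {h w : Int} {q : Int × Int} (hq : InB h w q) (h1 : q.1 + 1 < h) :
    InB h w (q.1 + 1, q.2) ∧ idxW w (q.1 + 1, q.2) = idxW w q + w ∧
      AdjC q (q.1 + 1, q.2) := by
  obtain ⟨a1, a2, a3, a4⟩ := hq
  refine ⟨⟨by omega, by omega, a3, a4⟩, ?_, Or.inr (Or.inl rfl)⟩
  unfold idxW; simp only; ring

theorem shift_left {h w : Int} {q : Int × Int} (hq : InB h w q) (h1 : 0 < q.2) :
    InB h w (q.1, q.2 - 1) ∧ idxW w (q.1, q.2 - 1) = idxW w q - 1 ∧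
      AdjC q (q.1, q.2 - 1) := by
  obtain ⟨a1, a2, a3, a4⟩ := hq
  refine ⟨⟨a1, a2, by omega, by omega⟩, ?_, Or.inr (Or.inr (Or.inl rfl))⟩
  unfold idxW; simp only; ring

theorem shift_right {h w : Int} {q : Int × Int} (hq : InB h w q) (h1 : q.2 + 1 < w) :
    InB h w (q.1, q.2 + 1) ∧ idxW w (q.1, q.2 + 1) = idxW w q + 1 ∧
      AdjC q (q.1, q.2 + 1) := by
  obtain ⟨a1, a2, a3, a4⟩ := hq
  refine ⟨⟨a1, a2, by omega, by omega⟩, ?_, Or.inr (Or.inr (Or.inr rfl))⟩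
  unfold idxW; simp only; ring

-- what one relaxation computes, stated linearly so omega can discharge each branch
theorem relax_cases (lab : List Int) (i h w : Int) :
    relax lab i h w = labGet lab i ∨
    (relax lab i h w = labGet lab (i - w) ∧ 0 ≤ labGet lab (i - w) ∧
      0 < PySem.Int.floordiv i w) ∨
    (relax lab i h w = labGet lab (i + w) ∧ 0 ≤ labGet lab (i + w) ∧
      PySem.Int.floordiv i w + 1 < h) ∨
    (relax lab i h w = labGet lab (i - 1) ∧ 0 ≤ labGet lab (i - 1) ∧
      0 < PySem.Int.mod i w) ∨
    (relax lab i h w = labGet lab (i + 1) ∧ 0 ≤ labGet lab (i + 1) ∧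
      PySem.Int.mod i w + 1 < w) := by
  simp only [relax]
  split_ifs <;> omega

theorem relax_le_self (lab : List Int) (i h w : Int) : relax lab i h w ≤ labGet lab i := by
  simp only [relax]
  split_ifs <;> omega

theorem relax_le_up (lab : List Int) (i h w : Int) (h1 : 0 < PySem.Int.floordiv i w)
    (h2 : 0 ≤ labGet lab (i - w)) : relax lab i h w ≤ labGet lab (i - w) := by
  simp only [relax]
  split_ifs <;> omega

theorem relax_le_down (lab : List Int) (i h w : Int) (h1 : PySem.Int.floordiv i w + 1 < h)
    (h2 : 0 ≤ labGet lab (i + w)) (h3 : 0 ≤ labGet lab i) :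
    relax lab i h w ≤ labGet lab (i + w) := by
  simp only [relax]
  split_ifs <;> omega

theorem relax_le_left (lab : List Int) (i h w : Int) (h1 : 0 < PySem.Int.mod i w)
    (h2 : 0 ≤ labGet lab (i - 1)) (h3 : 0 ≤ labGet lab i) :
    relax lab i h w ≤ labGet lab (i - 1) := by
  simp only [relax]
  split_ifs <;> omega

theorem relax_le_right (lab : List Int) (i h w : Int) (h1 : PySem.Int.mod i w + 1 < w)
    (h2 : 0 ≤ labGet lab (i + 1)) (h3 : 0 ≤ labGet lab i) :
    relax lab i h w ≤ labGet lab (i + 1) := by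
  simp only [relax]
  split_ifs <;> omega

theorem relax_neg (lab : List Int) (i h w : Int) (hneg : labGet lab i < 0) :
    relax lab i h w = labGet lab i := by
  simp only [relax]
  rw [if_pos hneg]

theorem stepL_length (h w : Int) (lab : List Int) (hh : 0 < h) (hw : 0 < w) :
    (stepL h w lab).length = h.toNat * w.toNat := by
  unfold stepL
  rw [List.length_map, PySem.List.length_pyRange_one]
  have := hw_toNat hh hw
  omega

theorem stepL_getElem (h w : Int) (lab : List Int) {i : Nat}
    (hi : i < (stepL h w lab).length) :
    (stepL h w lab)[i] = relax lab (i : Int) h w := by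
  unfold stepL at hi ⊢
  rw [List.getElem_map, PySem.List.getElem_pyRange_one, zero_add]


theorem stepL_inv {g : List (List Int)} {h w barrier : Int} {lab : List Int}
    (hh : 0 < h) (hw : 0 < w) (hinv : LabInv g h w barrier lab) :
    LabInv g h w barrier (stepL h w lab) ∧
    (∀ i : Nat, ∀ hi : i < (stepL h w lab).length, ∀ hi' : i < lab.length,
      (stepL h w lab)[i] ≤ lab[i]) := by
  obtain ⟨hlen, hmain⟩ := hinv
  have hNlen : (stepL h w lab).length = lab.length := by
    rw [stepL_length h w lab hh hw, hlen]
  have hcast := hw_toNat hh hw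
  -- pointwise view of indices as cells
  have hcell : ∀ i : Nat, i < lab.length →
      InB h w (pOfW w (i : Int)) ∧ idxW w (pOfW w (i : Int)) = (i : Int) := by
    intro i hi
    exact cell_of_idx hw (by positivity) (by rw [hlen] at hi; omega)
  refine ⟨⟨by rw [stepL_length h w lab hh hw], ?_⟩, ?_⟩
  · intro i hi
    have hi' : i < lab.length := by rwa [hNlen] at hi
    obtain ⟨hinB, hidx⟩ := hcell i hi'
    have hge : (stepL h w lab)[i] = relax lab (i : Int) h w := stepL_getElem h w lab hi
    have hgli : labGet lab (i : Int) = lab[i] := labGet_eq_getElem hi'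
    constructor
    · intro hok
      have hneg : lab[i] = -1 := (hmain i hi').1 hok
      rw [hge, relax_neg lab _ h w (by rw [hgli]; omega), hgli, hneg]
    · intro hok
      obtain ⟨q0, hq0r, hq0in, hq0v, hq0le⟩ := (hmain i hi').2 hok
      have hibnd : (0 : Int) ≤ (i : Int) ∧ (i : Int) < h * w := by
        constructor
        · positivity
        · rw [hlen] at hi'; omega
      -- helper closing the goal from a neighbour j
      have hnb : ∀ j : Int, 0 ≤ j → j < h * w →
          AdjC (pOfW w ((i : Int))) (pOfW w j) →
          relax lab (i : Int) h w = labGet lab j → 0 ≤ labGet lab j →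
          ∃ q, ReachC g h w barrier (pOfW w (i : Int)) q ∧ InB h w q ∧
            (stepL h w lab)[i] = idxW w q ∧ (stepL h w lab)[i] ≤ (i : Int) := by
        intro j hj0 hjlt hadj hval hnn
        have hokj : OkC g h w barrier (pOfW w j) :=
          labGet_nonneg_ok ⟨hlen, hmain⟩ hh hw hj0 hjlt hnn
        have hjn : j.toNat < lab.length := by rw [hlen]; omega
        have hje : ((j.toNat : Nat) : Int) = j := Int.toNat_of_nonneg hj0
        obtain ⟨q1, hq1r, hq1in, hq1v, _⟩ := (hmain j.toNat hjn).2 (by rwa [hje])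
        refine ⟨q1, ?_, hq1in, ?_, ?_⟩
        · refine Relation.ReflTransGen.head ⟨hok, hokj, hadj⟩ ?_
          rw [hje] at hq1r
          exact hq1r
        · have hlj : labGet lab j = lab[j.toNat]'hjn := by
            unfold labGet
            rw [List.getD_eq_getElem _ _ hjn]
          rw [hge, hval, hlj, hq1v]
        · have h1 : relax lab (i : Int) h w ≤ labGet lab (i : Int) := relax_le_self _ _ _ _
          rw [hge]
          rw [hgli] at h1
          omega
      rcases relax_cases lab (i : Int) h w with hcs | hcs | hcs | hcs | hcs
      · refine ⟨q0, hq0r, hq0in, ?_, ?_⟩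
        · rw [hge, hcs, hgli, hq0v]
        · rw [hge, hcs, hgli]; exact hq0le
      · obtain ⟨hval, hnn, hguard⟩ := hcs
        have hfd : PySem.Int.floordiv (i : Int) w = (pOfW w (i : Int)).1 := rfl
        obtain ⟨hin2, hidx2, hadj2⟩ := shift_up hinB (by rw [← hfd]; exact hguard)
        have hj0 : 0 ≤ (i : Int) - w := by
          have := idxW_bounds hin2; rw [hidx2, hidx] at this; omega
        have hjlt : (i : Int) - w < h * w := by
          have := idxW_bounds hin2; rw [hidx2, hidx] at this; omega
        have hpe : pOfW w ((i : Int) - w) = ((pOfW w (i : Int)).1 - 1, (pOfW w (i : Int)).2) := by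
          have := floordiv_idxW hin2
          rw [hidx2, hidx] at this
          exact Prod.ext this.1 this.2
        exact hnb ((i : Int) - w) hj0 hjlt (by rw [hpe]; exact hadj2) hval hnn
      · obtain ⟨hval, hnn, hguard⟩ := hcs
        have hfd : PySem.Int.floordiv (i : Int) w = (pOfW w (i : Int)).1 := rfl
        obtain ⟨hin2, hidx2, hadj2⟩ := shift_down hinB (by rw [← hfd]; exact hguard)
        have hj0 : 0 ≤ (i : Int) + w := by
          have := idxW_bounds hin2; rw [hidx2, hidx] at this; omega
        have hjlt : (i : Int) + w < h * w := by
          have := idxW_bounds hin2; rw [hidx2, hidx] at this; omega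
        have hpe : pOfW w ((i : Int) + w) = ((pOfW w (i : Int)).1 + 1, (pOfW w (i : Int)).2) := by
          have := floordiv_idxW hin2
          rw [hidx2, hidx] at this
          exact Prod.ext this.1 this.2
        exact hnb ((i : Int) + w) hj0 hjlt (by rw [hpe]; exact hadj2) hval hnn
      · obtain ⟨hval, hnn, hguard⟩ := hcs
        have hfd : PySem.Int.mod (i : Int) w = (pOfW w (i : Int)).2 := rfl
        obtain ⟨hin2, hidx2, hadj2⟩ := shift_left hinB (by rw [← hfd]; exact hguard)
        have hj0 : 0 ≤ (i : Int) - 1 := by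
          have := idxW_bounds hin2; rw [hidx2, hidx] at this; omega
        have hjlt : (i : Int) - 1 < h * w := by
          have := idxW_bounds hin2; rw [hidx2, hidx] at this; omega
        have hpe : pOfW w ((i : Int) - 1) = ((pOfW w (i : Int)).1, (pOfW w (i : Int)).2 - 1) := by
          have := floordiv_idxW hin2
          rw [hidx2, hidx] at this
          exact Prod.ext this.1 this.2
        exact hnb ((i : Int) - 1) hj0 hjlt (by rw [hpe]; exact hadj2) hval hnn
      · obtain ⟨hval, hnn, hguard⟩ := hcs
        have hfd : PySem.Int.mod (i : Int) w = (pOfW w (i : Int)).2 := rfl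
        obtain ⟨hin2, hidx2, hadj2⟩ := shift_right hinB (by rw [← hfd]; exact hguard)
        have hj0 : 0 ≤ (i : Int) + 1 := by positivity
        have hjlt : (i : Int) + 1 < h * w := by
          have := idxW_bounds hin2; rw [hidx2, hidx] at this; omega
        have hpe : pOfW w ((i : Int) + 1) = ((pOfW w (i : Int)).1, (pOfW w (i : Int)).2 + 1) := by
          have := floordiv_idxW hin2
          rw [hidx2, hidx] at this
          exact Prod.ext this.1 this.2
        exact hnb ((i : Int) + 1) hj0 hjlt (by rw [hpe]; exact hadj2) hval hnn
  · intro i hi hi'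
    rw [stepL_getElem h w lab hi, ← labGet_eq_getElem hi']
    exact relax_le_self _ _ _ _


def labM (lab : List Int) : Nat := (lab.map (fun x => (x + 1).toNat)).sum

theorem labM_lt : ∀ (a b : List Int), b.length = a.length →
    (∀ i : Nat, ∀ hi : i < b.length, ∀ hi' : i < a.length, b[i] ≤ a[i] ∧ -1 ≤ b[i]) →
    b ≠ a → labM b < labM a := by
  intro a
  induction a with
  | nil =>
    intro b hlen _ hne
    rw [List.length_nil, List.length_eq_zero_iff] at hlen
    exact absurd hlen hne
  | cons x a iha =>
    intro b hlen hle hne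
    match b with
    | [] => simp at hlen
    | y :: b =>
      have hlen' : b.length = a.length := by simpa using hlen
      have hy := hle 0 (by simp) (by simp)
      simp only [List.getElem_cons_zero] at hy
      have hb : ∀ i : Nat, ∀ hi : i < b.length, ∀ hi' : i < a.length, b[i] ≤ a[i] ∧ -1 ≤ b[i] := by
        intro i hi hi'
        have := hle (i + 1) (by simpa using hi) (by simpa using hi')
        simpa using this
      by_cases hxy : y = x
      · subst hxy
        have hbne : b ≠ a := by
          intro he; exact hne (by rw [he])
        have := iha b hlen' hb hbne
        simp only [labM, List.map_cons, List.sum_cons] at *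
        omega
      · have hrest : labM b ≤ labM a := by
          by_cases hba : b = a
          · rw [hba]
          · exact le_of_lt (iha b hlen' hb hba)
        simp only [labM, List.map_cons, List.sum_cons] at *
        have : (y + 1).toNat < (x + 1).toNat := by omega
        omega

theorem labM_le {lab : List Int} {g : List (List Int)} {h w barrier : Int}
    (hinv : LabInv g h w barrier lab) : labM lab ≤ lab.length * lab.length := by
  obtain ⟨hlen, hmain⟩ := hinv
  unfold labM
  have hb : ∀ x ∈ lab.map (fun x => (x + 1).toNat), x ≤ lab.length := by
    intro x hx
    rw [List.mem_map] at hx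
    obtain ⟨v, hv, rfl⟩ := hx
    obtain ⟨i, hi, rfl⟩ := List.getElem_of_mem hv
    rcases Classical.em (OkC g h w barrier (pOfW w (i : Int))) with hok | hok
    · obtain ⟨q, _, _, _, hle⟩ := (hmain i hi).2 hok
      omega
    · have := (hmain i hi).1 hok
      omega
  have := List.sum_le_card_nsmul _ _ hb
  simpa using this

theorem lab_ge_neg1 {lab : List Int} {g : List (List Int)} {h w barrier : Int}
    (hinv : LabInv g h w barrier lab) :
    ∀ i : Nat, ∀ hi : i < lab.length, -1 ≤ lab[i] := by
  intro i hi
  obtain ⟨hlen, hmain⟩ := hinv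
  rcases Classical.em (OkC g h w barrier (pOfW w (i : Int))) with hok | hok
  · obtain ⟨q, _, hqin, hval, _⟩ := (hmain i hi).2 hok
    have := idxW_bounds hqin
    omega
  · have := (hmain i hi).1 hok
    omega

theorem iterL_fix {g : List (List Int)} {h w barrier : Int} (hh : 0 < h) (hw : 0 < w) :
    ∀ (f : Nat) (lab : List Int), LabInv g h w barrier lab → labM lab < f →
    LabInv g h w barrier (iterL h w f lab) ∧
      stepL h w (iterL h w f lab) = iterL h w f lab := by
  intro f
  induction f with
  | zero => intro lab _ hm; omega
  | succ f ihf =>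
    intro lab hinv hm
    have hunf : iterL h w (f + 1) lab =
        if stepL h w lab = lab then lab else iterL h w f (stepL h w lab) := rfl
    by_cases hfix : stepL h w lab = lab
    · rw [hunf, if_pos hfix]
      exact ⟨hinv, hfix⟩
    · have hit : iterL h w (f + 1) lab = iterL h w f (stepL h w lab) := by
        rw [hunf, if_neg hfix]
    -- the measure strictly decreases on an effective sweep
      obtain ⟨hinv', hle⟩ := stepL_inv hh hw hinv
      have hlen' : (stepL h w lab).length = lab.length := by
        rw [stepL_length h w lab hh hw, hinv.1]
      have hdec : labM (stepL h w lab) < labM lab := by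
        refine labM_lt lab (stepL h w lab) hlen' ?_ hfix
        intro i hi hi'
        exact ⟨hle i hi hi', lab_ge_neg1 hinv' i hi⟩
      rw [hit]
      exact ihf (stepL h w lab) hinv' (by omega)

theorem labget_ok_nonneg {lab : List Int} {g : List (List Int)} {h w barrier : Int}
    (hinv : LabInv g h w barrier lab) (hh : 0 < h) (hw : 0 < w) {q : Int × Int}
    (hq : OkC g h w barrier q) :
    ∃ q', ReachC g h w barrier q q' ∧ InB h w q' ∧
      labGet lab (idxW w q) = idxW w q' ∧ labGet lab (idxW w q) ≤ idxW w q := by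
  obtain ⟨hlen, hmain⟩ := hinv
  obtain ⟨hb0, hblt⟩ := idxW_bounds hq.1
  have hn : (idxW w q).toNat < lab.length := by
    rw [hlen]
    have := hw_toNat hh hw
    omega
  have hje : (((idxW w q).toNat : Nat) : Int) = idxW w q := Int.toNat_of_nonneg hb0
  have hpq : pOfW w ((((idxW w q).toNat : Nat) : Int)) = q := by
    rw [hje]
    have := floordiv_idxW hq.1
    exact Prod.ext this.1 this.2
  obtain ⟨q', hr, hin', hval, hle⟩ := (hmain (idxW w q).toNat hn).2 (by rwa [hpq])
  rw [hpq] at hr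
  rw [hje] at hle
  refine ⟨q', hr, hin', ?_, ?_⟩
  · rw [show labGet lab (idxW w q) = lab[(idxW w q).toNat]'hn from by
      unfold labGet; rw [List.getD_eq_getElem _ _ hn]]
    exact hval
  · rw [show labGet lab (idxW w q) = lab[(idxW w q).toNat]'hn from by
      unfold labGet; rw [List.getD_eq_getElem _ _ hn]]
    exact hle

theorem fix_le_adj {lab : List Int} {g : List (List Int)} {h w barrier : Int}
    (hinv : LabInv g h w barrier lab) (hh : 0 < h) (hw : 0 < w)
    (hfix : stepL h w lab = lab) {p q : Int × Int}
    (hp : OkC g h w barrier p) (hq : OkC g h w barrier q) (hadj : AdjC p q) :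
    labGet lab (idxW w p) ≤ labGet lab (idxW w q) := by
  obtain ⟨hb0, hblt⟩ := idxW_bounds hp.1
  have hn : (idxW w p).toNat < lab.length := by
    rw [hinv.1]
    have := hw_toNat hh hw
    omega
  have hn2 : (idxW w p).toNat < (stepL h w lab).length := by
    rw [stepL_length h w lab hh hw]
    rw [hinv.1] at hn
    exact hn
  have hje : (((idxW w p).toNat : Nat) : Int) = idxW w p := Int.toNat_of_nonneg hb0
  have hlabrelax : labGet lab (idxW w p) = relax lab (idxW w p) h w := by
    have h1 : labGet (stepL h w lab) (idxW w p) = relax lab (idxW w p) h w := by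
      unfold labGet
      rw [List.getD_eq_getElem _ _ hn2, stepL_getElem h w lab hn2, hje]
    rw [← h1, hfix]
  have hfd : PySem.Int.floordiv (idxW w p) w = p.1 := (floordiv_idxW hp.1).1
  have hmd : PySem.Int.mod (idxW w p) w = p.2 := (floordiv_idxW hp.1).2
  have hqnn : 0 ≤ labGet lab (idxW w q) := by
    obtain ⟨q', hr', hin', hval', _⟩ := labget_ok_nonneg hinv hh hw hq
    have := idxW_bounds hin'
    omega
  have hpnn : 0 ≤ labGet lab (idxW w p) := by
    obtain ⟨q', hr', hin', hval', _⟩ := labget_ok_nonneg hinv hh hw hp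
    have := idxW_bounds hin'
    omega
  rcases hadj with he | he | he | he
  · -- q = (p.1 - 1, p.2): up
    have hup : idxW w q = idxW w p - w := by
      rw [he]; unfold idxW; simp only; ring
    have hg : 0 < PySem.Int.floordiv (idxW w p) w := by
      rw [hfd]
      have := hq.1.1
      rw [he] at this
      simp only at this
      omega
    rw [hlabrelax, hup]
    exact relax_le_up lab _ h w hg (by rwa [hup] at hqnn)
  · have hdn : idxW w q = idxW w p + w := by
      rw [he]; unfold idxW; simp only; ring
    have hg : PySem.Int.floordiv (idxW w p) w + 1 < h := by
      rw [hfd]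
      have := hq.1.2.1
      rw [he] at this
      simp only at this
      omega
    rw [hlabrelax, hdn]
    exact relax_le_down lab _ h w hg (by rwa [hdn] at hqnn) hpnn
  · have hlf : idxW w q = idxW w p - 1 := by
      rw [he]; unfold idxW; simp only; ring
    have hg : 0 < PySem.Int.mod (idxW w p) w := by
      rw [hmd]
      have := hq.1.2.2.1
      rw [he] at this
      simp only at this
      omega
    rw [hlabrelax, hlf]
    exact relax_le_left lab _ h w hg (by rwa [hlf] at hqnn) hpnn
  · have hrt : idxW w q = idxW w p + 1 := by
      rw [he]; unfold idxW; simp only; ring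
    have hg : PySem.Int.mod (idxW w p) w + 1 < w := by
      rw [hmd]
      have := hq.1.2.2.2
      rw [he] at this
      simp only at this
      omega
    rw [hlabrelax, hrt]
    exact relax_le_right lab _ h w hg (by rwa [hrt] at hqnn) hpnn

theorem fix_reach_const {lab : List Int} {g : List (List Int)} {h w barrier : Int}
    (hinv : LabInv g h w barrier lab) (hh : 0 < h) (hw : 0 < w)
    (hfix : stepL h w lab = lab) {p q : Int × Int}
    (hr : ReachC g h w barrier p q) :
    labGet lab (idxW w p) = labGet lab (idxW w q) := by
  induction hr with
  | refl => rfl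
  | tail _ hstep ih =>
    obtain ⟨hx, hy, hadj⟩ := hstep
    have h1 := fix_le_adj hinv hh hw hfix hx hy hadj
    have h2 := fix_le_adj hinv hh hw hfix hy hx (adjC_symm hadj)
    omega

-- at the fixpoint, every member of a component is labelled with its seed's index
theorem lab_eq_seed {lab : List Int} {g : List (List Int)} {h w barrier : Int}
    (hinv : LabInv g h w barrier lab) (hh : 0 < h) (hw : 0 < w)
    (hfix : stepL h w lab = lab) {s : Int × Int} {cells : List (Int × Int)}
    (hoks : OkC g h w barrier s)
    (hmem : ∀ p : Int × Int, p ∈ cells ↔ ReachC g h w barrier s p)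
    (hmin : ∀ p ∈ cells, idxW w s ≤ idxW w p) :
    ∀ q ∈ cells, labGet lab (idxW w q) = idxW w s := by
  intro q hq
  have h1 : labGet lab (idxW w s) = labGet lab (idxW w q) :=
    fix_reach_const hinv hh hw hfix ((hmem q).mp hq)
  obtain ⟨q', hr', hin', hval', hle'⟩ := labget_ok_nonneg hinv hh hw hoks
  have hq' : q' ∈ cells := (hmem q').mpr hr'
  have := hmin q' hq'
  omega

theorem initLab_inv {g : List (List Int)} {h w barrier : Int} (hh : 0 < h) (hw : 0 < w) :
    LabInv g h w barrier (initLab g w barrier (h * w)) ∧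
    (∀ i : Nat, ∀ hi : i < (initLab g w barrier (h * w)).length,
      (initLab g w barrier (h * w))[i] =
        if cellAt g (pOfW w (i : Int)).1 (pOfW w (i : Int)).2 = barrier then -1 else (i : Int)) := by
  have hlen : (initLab g w barrier (h * w)).length = h.toNat * w.toNat := by
    unfold initLab
    rw [List.length_map, PySem.List.length_pyRange_one]
    have := hw_toNat hh hw
    omega
  have hget : ∀ i : Nat, ∀ hi : i < (initLab g w barrier (h * w)).length,
      (initLab g w barrier (h * w))[i] =
        if cellAt g (pOfW w (i : Int)).1 (pOfW w (i : Int)).2 = barrier then -1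
        else (i : Int) := by
    intro i hi
    unfold initLab at hi ⊢
    rw [List.getElem_map, PySem.List.getElem_pyRange_one, zero_add]
    rfl
  refine ⟨⟨hlen, ?_⟩, hget⟩
  intro i hi
  have hcast := hw_toNat hh hw
  obtain ⟨hinB, hidx⟩ := cell_of_idx hw (show (0 : Int) ≤ (i : Int) by positivity)
    (show (i : Int) < h * w by rw [hlen] at hi; omega)
  constructor
  · intro hok
    rw [hget i hi]
    have hbar : cellAt g (pOfW w (i : Int)).1 (pOfW w (i : Int)).2 = barrier := by
      by_contra hc
      exact hok ⟨hinB, hc⟩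
    rw [if_pos hbar]
  · intro hok
    rw [hget i hi, if_neg hok.2]
    exact ⟨pOfW w (i : Int), Relation.ReflTransGen.refl, hinB, hidx.symm, by omega⟩


-- ===== B-side: per-label aggregation =====
-- the loop body of bStats, named for the proofs (definitionally the port's lambda)
def bAggStep (w : Int) (lab : List Int) (st : PySem.Dict Int (Int × Int × Int)) (i : Int) :
    PySem.Dict Int (Int × Int × Int) :=
  let L := labGet lab i
  if L < 0 then st
  else
    let r := PySem.Int.floordiv i w
    let c := PySem.Int.mod i w
    match st.get? L with
    | none => st.insert L (1, r, c)
    | some s => st.insert L (s.1 + 1, if s.2.1 < r then s.2.1 else r,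
        if s.2.2 < c then s.2.2 else c)

def aggStep (w : Int) : Option (Int × Int × Int) → Int → Option (Int × Int × Int) := fun o j =>
  match o with
  | none => some (1, PySem.Int.floordiv j w, PySem.Int.mod j w)
  | some s => some (s.1 + 1,
      if s.2.1 < PySem.Int.floordiv j w then s.2.1 else PySem.Int.floordiv j w,
      if s.2.2 < PySem.Int.mod j w then s.2.2 else PySem.Int.mod j w)

def aggOf (w : Int) (L : List Int) : Option (Int × Int × Int) := L.foldl (aggStep w) none

def flatOf (lab : List Int) (key : Int) (k : Int) : List Int :=
  (PySem.List.pyRange 0 k 1).filter (fun j => labGet lab j == key)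

theorem bStats_eq_fold (h w : Int) (lab : List Int) :
    bStats h w lab = (PySem.List.pyRange 0 (h * w) 1).foldl (bAggStep w lab)
      PySem.Dict.empty := rfl

theorem aggOf_append (w : Int) (L : List Int) (j : Int) :
    aggOf w (L ++ [j]) = aggStep w (aggOf w L) j := by
  unfold aggOf
  rw [List.foldl_append]
  rfl

theorem aggOf_isSome (w : Int) : ∀ (L : List Int), L ≠ [] → (aggOf w L).isSome = true := by
  have hsome : ∀ (L : List Int) (s : Int × Int × Int),
      (L.foldl (aggStep w) (some s)).isSome = true := by
    intro L
    induction L with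
    | nil => intro s; rfl
    | cons x t iht => intro s; exact iht _
  intro L hne
  match L with
  | [] => exact absurd rfl hne
  | x :: t =>
    show (List.foldl (aggStep w) (aggStep w none x) t).isSome = true
    exact hsome t _

theorem flatOf_succ (lab : List Int) (key : Int) (k : Nat) :
    flatOf lab key ((k : Int) + 1) =
      flatOf lab key (k : Int) ++ (if labGet lab (k : Int) == key then [(k : Int)] else []) := by
  unfold flatOf
  rw [PySem.List.pyRange_one_succ_right (by positivity), List.filter_append]
  congr 1
  simp only [List.filter_cons, List.filter_nil]

theorem mem_flatOf {lab : List Int} {key k j : Int} :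
    j ∈ flatOf lab key k ↔ (0 ≤ j ∧ j < k ∧ labGet lab j = key) := by
  unfold flatOf
  rw [List.mem_filter, PySem.List.mem_pyRange_one]
  constructor
  · rintro ⟨⟨h1, h2⟩, h3⟩
    exact ⟨h1, h2, by simpa using h3⟩
  · rintro ⟨h1, h2, h3⟩
    exact ⟨⟨h1, h2⟩, by simpa using h3⟩

theorem filter_lt_succ_no {α : Type} (f : α → Int) (k : Int) :
    ∀ (l : List α), (∀ x ∈ l, f x ≠ k) →
    l.filter (fun x => decide (f x < k + 1)) = l.filter (fun x => decide (f x < k)) := by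
  intro l hno
  apply List.filter_congr
  intro x hx
  have := hno x hx
  simp only [decide_eq_decide]
  omega

theorem filter_lt_succ_yes {α : Type} (f : α → Int) (k : Int) :
    ∀ (l : List α), l.Pairwise (fun a b => f a < f b) →
    ∀ x ∈ l, f x = k →
    l.filter (fun a => decide (f a < k + 1)) = l.filter (fun a => decide (f a < k)) ++ [x] := by
  intro l
  induction l with
  | nil => intro _ x hx; cases hx
  | cons y t iht =>
    intro hpw x hx hfx
    obtain ⟨hhead, htail⟩ := List.pairwise_cons.mp hpw
    rcases List.mem_cons.mp hx with rfl | hxt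
    · have htno : ∀ a ∈ t, ¬ f a < k + 1 := by
        intro a ha
        have := hhead a ha
        omega
      have h1 : t.filter (fun a => decide (f a < k + 1)) = [] := by
        rw [List.filter_eq_nil_iff]
        intro a ha
        simpa using htno a ha
      have h2 : t.filter (fun a => decide (f a < k)) = [] := by
        rw [List.filter_eq_nil_iff]
        intro a ha
        have := htno a ha
        simp only [decide_eq_true_eq]
        omega
      simp only [List.filter_cons, h1, h2]
      rw [if_pos (by simp; omega), if_neg (by simp; omega)]
      rfl
    · have hylt : f y < k := hfx ▸ hhead x hxt
      simp only [List.filter_cons]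
      rw [if_pos (by simp; omega), if_pos (by simp; omega),
        iht htail x hxt hfx]
      rfl


-- stage 1: the aggregation dict after the first k cells, characterised per component
theorem agg_spec (h w : Int) (lab : List Int)
    (comps : List ((Int × Int) × List (Int × Int)))
    (hpos : ∀ j : Int, 0 ≤ j → j < h * w → 0 ≤ labGet lab j →
      ∃ sc ∈ comps, labGet lab j = idxW w sc.1)
    (hseed : ∀ sc ∈ comps, labGet lab (idxW w sc.1) = idxW w sc.1 ∧
      0 ≤ idxW w sc.1 ∧ idxW w sc.1 < h * w)
    (hpw : comps.Pairwise (fun a b => idxW w a.1 < idxW w b.1))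
    (hle : ∀ j : Int, 0 ≤ j → j < h * w → labGet lab j ≤ j) :
    ∀ k : Nat, (k : Int) ≤ h * w →
    ((PySem.List.pyRange 0 (k : Int) 1).foldl (bAggStep w lab) PySem.Dict.empty).items
      = (comps.filter (fun sc => decide (idxW w sc.1 < (k : Int)))).map
          (fun sc => (idxW w sc.1,
            (aggOf w (flatOf lab (idxW w sc.1) (k : Int))).getD (0, 0, 0))) := by
  intro k
  induction k with
  | zero =>
    intro _
    have h1 : (comps.filter (fun sc => decide (idxW w sc.1 < ((0 : Nat) : Int)))) = [] := by
      rw [List.filter_eq_nil_iff]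
      intro sc hsc
      have := (hseed sc hsc).2.1
      simp only [Nat.cast_zero, decide_eq_true_eq]
      omega
    rw [h1]
    rfl
  | succ k ihk =>
    intro hk1
    have hk : (k : Int) ≤ h * w := by push_cast at hk1 ⊢; omega
    have hkk : ((k + 1 : Nat) : Int) = (k : Int) + 1 := by push_cast; ring
    rw [hkk, PySem.List.pyRange_one_succ_right (by positivity), List.foldl_append,
      List.foldl_cons, List.foldl_nil]
    set st := ((PySem.List.pyRange 0 (k : Int) 1).foldl (bAggStep w lab) PySem.Dict.empty)
      with hst
    have hitems : st.items = (comps.filter (fun sc => decide (idxW w sc.1 < (k : Int)))).map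
        (fun sc => (idxW w sc.1,
          (aggOf w (flatOf lab (idxW w sc.1) (k : Int))).getD (0, 0, 0))) := ihk hk
    have hkeys : st.keys = (comps.filter
        (fun sc => decide (idxW w sc.1 < (k : Int)))).map (fun sc => idxW w sc.1) := by
      show st.items.map Prod.fst = _
      rw [hitems, List.map_map]
      rfl
    have hkeysnd : st.keys.Nodup := by
      rw [hkeys]
      have h2 : (comps.filter (fun sc => decide (idxW w sc.1 < (k : Int)))).Pairwise
          (fun a b => idxW w a.1 < idxW w b.1) := hpw.filter _
      exact (List.pairwise_map.mpr (h2.imp (fun hab => ne_of_lt hab)))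
    by_cases hL : labGet lab (k : Int) < 0
    · -- barrier cell: nothing changes
      have hbody : bAggStep w lab st (k : Int) = st := by
        unfold bAggStep
        rw [if_pos hL]
      rw [hbody, hitems]
      have hno : ∀ sc ∈ comps, idxW w sc.1 ≠ (k : Int) := by
        intro sc hsc he
        have h1 := (hseed sc hsc).1
        rw [he] at h1
        have h2 := (hseed sc hsc).2.1
        rw [he] at h2
        omega
      rw [filter_lt_succ_no (fun sc => idxW w sc.1) (k : Int) comps hno]
      apply List.map_congr_left
      intro sc hsc
      rw [List.mem_filter] at hsc
      have hne : (labGet lab (k : Int) == idxW w sc.1) = false := by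
        have := (hseed sc hsc.1).2.1
        simp only [beq_eq_false_iff_ne, ne_eq]
        omega
      rw [flatOf_succ, hne]
      simp
    · push_neg at hL
      have hkbnd : (k : Int) < h * w := by omega
      obtain ⟨sci, hsci, hLval⟩ := hpos (k : Int) (by positivity) hkbnd hL
      have hLle : labGet lab (k : Int) ≤ (k : Int) := hle (k : Int) (by positivity) hkbnd
      -- components other than sci keep their flat lists
      have hflat_other : ∀ sc ∈ comps, idxW w sc.1 ≠ idxW w sci.1 →
          flatOf lab (idxW w sc.1) ((k : Int) + 1) = flatOf lab (idxW w sc.1) (k : Int) := by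
        intro sc hsc hne
        rw [flatOf_succ]
        have : (labGet lab (k : Int) == idxW w sc.1) = false := by
          simp only [beq_eq_false_iff_ne, ne_eq]
          rw [hLval]
          omega
        rw [this]
        simp
      have hflat_sci : flatOf lab (idxW w sci.1) ((k : Int) + 1)
          = flatOf lab (idxW w sci.1) (k : Int) ++ [(k : Int)] := by
        rw [flatOf_succ]
        have : (labGet lab (k : Int) == idxW w sci.1) = true := by
          simpa using hLval
        rw [this]
        simp
      by_cases hnew : idxW w sci.1 = (k : Int)
      · -- first cell of this component (its seed is the cell being processed)
        have hflatnil : flatOf lab (idxW w sci.1) (k : Int) = [] := by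
          rw [List.eq_nil_iff_forall_not_mem]
          intro j hj
          rw [mem_flatOf] at hj
          obtain ⟨h1, h2, h3⟩ := hj
          have := hle j h1 (by omega)
          omega
        have hnotmem : st.contains (labGet lab (k : Int)) = false := by
          rw [← Bool.not_eq_true, PySem.Dict.contains_iff_mem_keys, hkeys]
          intro hmem
          rw [List.mem_map] at hmem
          obtain ⟨sc, hsc, hval⟩ := hmem
          rw [List.mem_filter] at hsc
          have := hsc.2
          rw [hval] at this
          simp only [decide_eq_true_eq] at this
          omega
        have hget : st.get? (labGet lab (k : Int)) = none := by
          rw [PySem.Dict.get?_eq_none_iff_contains]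
          exact hnotmem
        have hbody : bAggStep w lab st (k : Int) = st.insert (labGet lab (k : Int))
            (1, PySem.Int.floordiv (k : Int) w, PySem.Int.mod (k : Int) w) := by
          unfold bAggStep
          rw [if_neg (by omega)]
          simp only [hget]
        rw [hbody, PySem.Dict.items_insert_of_not_contains _ _ hnotmem, hitems]
        rw [filter_lt_succ_yes (fun sc => idxW w sc.1) (k : Int) comps hpw sci hsci hnew]
        rw [List.map_append]
        congr 1
        · apply List.map_congr_left
          intro sc hsc
          rw [List.mem_filter] at hsc
          have hlt : idxW w sc.1 < (k : Int) := by
            have := hsc.2; simpa using this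
          rw [hflat_other sc hsc.1 (by omega)]
        · simp only [List.map_cons, List.map_nil]
          rw [hflat_sci, hflatnil, List.nil_append]
          rw [show aggOf w [(k : Int)] = some (1, PySem.Int.floordiv (k : Int) w,
            PySem.Int.mod (k : Int) w) from rfl]
          rw [hLval] at *
          rw [hnew]
          rfl
      · -- the component was seen before: its seed index is smaller than k
        have hseedlt : idxW w sci.1 < (k : Int) := by
          have := (hseed sci hsci).2.1
          omega
        have hscifil : sci ∈ comps.filter (fun sc => decide (idxW w sc.1 < (k : Int))) := by
          rw [List.mem_filter]
          exact ⟨hsci, by simpa using hseedlt⟩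
        have hmemit : (idxW w sci.1,
            (aggOf w (flatOf lab (idxW w sci.1) (k : Int))).getD (0, 0, 0)) ∈ st.items := by
          rw [hitems]
          exact List.mem_map_of_mem hscifil
        have hget : st.get? (labGet lab (k : Int))
            = some ((aggOf w (flatOf lab (idxW w sci.1) (k : Int))).getD (0, 0, 0)) := by
          rw [hLval]
          exact PySem.Dict.get?_of_mem_items st hmemit hkeysnd
        have hcont : st.contains (labGet lab (k : Int)) = true := by
          rw [PySem.Dict.contains_iff_mem_keys, hkeys, hLval]
          rw [List.mem_map]
          exact ⟨sci, hscifil, rfl⟩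
        set s0 := (aggOf w (flatOf lab (idxW w sci.1) (k : Int))).getD (0, 0, 0) with hs0
        have hbody : bAggStep w lab st (k : Int) = st.insert (labGet lab (k : Int))
            (s0.1 + 1,
              if s0.2.1 < PySem.Int.floordiv (k : Int) w then s0.2.1
                else PySem.Int.floordiv (k : Int) w,
              if s0.2.2 < PySem.Int.mod (k : Int) w then s0.2.2
                else PySem.Int.mod (k : Int) w) := by
          unfold bAggStep
          rw [if_neg (by omega)]
          simp only [hget]
        have hsome : (aggOf w (flatOf lab (idxW w sci.1) (k : Int))).isSome = true := by
          apply aggOf_isSome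
          intro hnil
          have : idxW w sci.1 ∈ flatOf lab (idxW w sci.1) (k : Int) := by
            rw [mem_flatOf]
            exact ⟨(hseed sci hsci).2.1, hseedlt, (hseed sci hsci).1⟩
          rw [hnil] at this
          cases this
        obtain ⟨v0, hv0⟩ := Option.isSome_iff_exists.mp hsome
        have hnok : ∀ sc ∈ comps, idxW w sc.1 ≠ (k : Int) := by
          intro sc hsc he
          have h1 := (hseed sc hsc).1
          rw [he, hLval] at h1
          omega
        rw [hbody, PySem.Dict.items_insert_of_contains _ _ hcont, hitems]
        rw [filter_lt_succ_no (fun sc => idxW w sc.1) (k : Int) comps hnok]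
        rw [List.map_map]
        apply List.map_congr_left
        intro sc hsc
        rw [List.mem_filter] at hsc
        by_cases hsame : idxW w sc.1 = idxW w sci.1
        · have hbeq : ((idxW w sc.1,
              (aggOf w (flatOf lab (idxW w sc.1) (k : Int))).getD (0, 0, 0)).1
                == labGet lab (k : Int)) = true := by
            simp only [beq_iff_eq]
            rw [hLval, hsame]
          simp only [Function.comp_apply, hbeq, if_pos]
          rw [hsame, hflat_sci, aggOf_append, hv0]
          simp only [hs0, hv0, Option.getD_some]
          rw [hLval]
          rfl
        · have hbeq : ((idxW w sc.1,
              (aggOf w (flatOf lab (idxW w sc.1) (k : Int))).getD (0, 0, 0)).1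
                == labGet lab (k : Int)) = false := by
            simp only [beq_eq_false_iff_ne, ne_eq]
            rw [hLval]
            exact hsame
          simp only [Function.comp_apply, hbeq, if_neg, Bool.false_eq_true,
            not_false_iff]
          rw [hflat_other sc hsc.1 hsame]


-- stage 2: the aggregate of a non-empty flat list, and min-folds
def minA (l : List Int) (a : Int) : Int := l.foldl (fun m x => if x < m then x else m) a
def minB (l : List Int) (a : Int) : Int := l.foldl (fun m x => if m < x then m else x) a

theorem minA_le_init : ∀ (l : List Int) (a : Int), minA l a ≤ a := by
  intro l
  induction l with
  | nil => intro a; exact le_refl a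
  | cons x t iht =>
    intro a
    simp only [minA, List.foldl_cons] at *
    have := iht (if x < a then x else a)
    split_ifs at this ⊢ <;> omega

theorem minB_le_init : ∀ (l : List Int) (a : Int), minB l a ≤ a := by
  intro l
  induction l with
  | nil => intro a; exact le_refl a
  | cons x t iht =>
    intro a
    simp only [minB, List.foldl_cons] at *
    have := iht (if a < x then a else x)
    split_ifs at this ⊢ <;> omega

theorem minA_le_mem : ∀ (l : List Int) (a x : Int), x ∈ l → minA l a ≤ x := by
  intro l
  induction l with
  | nil => intro a x hx; cases hx
  | cons y t iht =>
    intro a x hx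
    rcases List.mem_cons.mp hx with rfl | hxt
    · have := minA_le_init t (if x < a then x else a)
      simp only [minA] at this
      simp only [minA, List.foldl_cons]
      split_ifs at this ⊢ <;> omega
    · exact iht _ x hxt

theorem minB_le_mem : ∀ (l : List Int) (a x : Int), x ∈ l → minB l a ≤ x := by
  intro l
  induction l with
  | nil => intro a x hx; cases hx
  | cons y t iht =>
    intro a x hx
    rcases List.mem_cons.mp hx with rfl | hxt
    · have := minB_le_init t (if a < x then a else x)
      simp only [minB] at this
      simp only [minB, List.foldl_cons]
      split_ifs at this ⊢ <;> omega
    · exact iht _ x hxt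

theorem minA_mem_or : ∀ (l : List Int) (a : Int), minA l a = a ∨ minA l a ∈ l := by
  intro l
  induction l with
  | nil => intro a; exact Or.inl rfl
  | cons x t iht =>
    intro a
    simp only [minA, List.foldl_cons]
    rcases iht (if x < a then x else a) with he | hm
    · simp only [minA] at he
      rw [he]
      split_ifs with hx
      · exact Or.inr List.mem_cons_self
      · exact Or.inl rfl
    · simp only [minA] at hm
      exact Or.inr (List.mem_cons_of_mem _ hm)

theorem minB_mem_or : ∀ (l : List Int) (a : Int), minB l a = a ∨ minB l a ∈ l := by
  intro l
  induction l with
  | nil => intro a; exact Or.inl rfl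
  | cons x t iht =>
    intro a
    simp only [minB, List.foldl_cons]
    rcases iht (if a < x then a else x) with he | hm
    · simp only [minB] at he
      rw [he]
      split_ifs with hx
      · exact Or.inl rfl
      · exact Or.inr List.mem_cons_self
    · simp only [minB] at hm
      exact Or.inr (List.mem_cons_of_mem _ hm)

theorem minA_eq_minB (l1 l2 : List Int) (a b : Int)
    (hset : ∀ x : Int, x ∈ a :: l1 ↔ x ∈ b :: l2) : minA l1 a = minB l2 b := by
  have hmA : minA l1 a ∈ a :: l1 := by
    rcases minA_mem_or l1 a with he | hm
    · rw [he]; exact List.mem_cons_self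
    · exact List.mem_cons_of_mem _ hm
  have hmB : minB l2 b ∈ b :: l2 := by
    rcases minB_mem_or l2 b with he | hm
    · rw [he]; exact List.mem_cons_self
    · exact List.mem_cons_of_mem _ hm
  have h1 : minB l2 b ≤ minA l1 a := by
    rcases List.mem_cons.mp ((hset _).mp hmA) with he | hm
    · rw [he]; exact minB_le_init l2 b
    · exact minB_le_mem l2 b _ hm
  have h2 : minA l1 a ≤ minB l2 b := by
    rcases List.mem_cons.mp ((hset _).mpr hmB) with he | hm
    · rw [he]; exact minA_le_init l1 a
    · exact minA_le_mem l1 a _ hm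
  omega

theorem aggOf_cons (w : Int) : ∀ (t : List Int) (j0 : Int),
    aggOf w (j0 :: t) = some (((j0 :: t).length : Int),
      minB (t.map (fun j => PySem.Int.floordiv j w)) (PySem.Int.floordiv j0 w),
      minB (t.map (fun j => PySem.Int.mod j w)) (PySem.Int.mod j0 w)) := by
  have haux : ∀ (t : List Int) (s : Int × Int × Int),
      t.foldl (aggStep w) (some s) = some (s.1 + (t.length : Int),
        minB (t.map (fun j => PySem.Int.floordiv j w)) s.2.1,
        minB (t.map (fun j => PySem.Int.mod j w)) s.2.2) := by
    intro t
    induction t with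
    | nil => intro s; simp [minB]
    | cons x t iht =>
      intro s
      simp only [List.foldl_cons, List.map_cons, List.length_cons]
      rw [show aggStep w (some s) x = some (s.1 + 1,
        if s.2.1 < PySem.Int.floordiv x w then s.2.1 else PySem.Int.floordiv x w,
        if s.2.2 < PySem.Int.mod x w then s.2.2 else PySem.Int.mod x w) from rfl]
      rw [iht]
      simp only [minB, List.foldl_cons]
      congr 1
      push_cast
      ring_nf
  intro t j0
  show List.foldl (aggStep w) (aggStep w none j0) t = _
  rw [show aggStep w none j0 = some (1, PySem.Int.floordiv j0 w, PySem.Int.mod j0 w) from rfl,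
    haux]
  simp only [List.length_cons]
  congr 2
  push_cast
  ring


-- payload of a component entry (A stores it with its id, B with its seed index)
def payl (l : List (Int × Int)) (s : Int × Int) : Int × Int × Int :=
  ((l.length : Int),
    l.foldl (fun m p => if p.1 < m then p.1 else m) s.1,
    l.foldl (fun m p => if p.2 < m then p.2 else m) s.2)

theorem enumA_entry (n : Nat) (sc : (Int × Int) × List (Int × Int))
    (l : List ((Int × Int) × List (Int × Int))) :
    enumA n (sc :: l) = ((n : Int), payl sc.2 sc.1) :: enumA (n + 1) l := rfl

-- the two selection folds walk in lockstep
theorem best_pair (w : Int) (comps : List ((Int × Int) × List (Int × Int))) :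
    ∀ (l : List ((Int × Int) × List (Int × Int))) (n : Nat), comps.drop n = l →
    ∀ (jA κ : Int) (v : Int × Int × Int),
    (∃ m : Nat, ∃ hm : m < comps.length, jA = (m : Int) ∧
      κ = idxW w (comps[m]'hm).1 ∧ v = payl (comps[m]'hm).2 (comps[m]'hm).1) →
    ∃ (jA' κ' : Int) (v' : Int × Int × Int),
      (enumA n l).foldl (fun best x =>
          if tripleGt (x.2.1, -x.2.2.1, -x.2.2.2) (best.2.1, -best.2.2.1, -best.2.2.2)
          then x else best) (jA, v.1, v.2.1, v.2.2) = (jA', v'.1, v'.2.1, v'.2.2) ∧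
      (l.map (fun sc => (idxW w sc.1, payl sc.2 sc.1))).foldl
          (fun (best : Option Int × Option (Int × Int × Int)) p =>
            let key := (p.2.1, -p.2.2.1, -p.2.2.2)
            match best.2 with
            | none => (some p.1, some key)
            | some bk => if tripleGt key bk then (some p.1, some key) else best)
          (some κ, some (v.1, -v.2.1, -v.2.2)) = (some κ', some (v'.1, -v'.2.1, -v'.2.2)) ∧
      (∃ m : Nat, ∃ hm : m < comps.length, jA' = (m : Int) ∧
        κ' = idxW w (comps[m]'hm).1 ∧ v' = payl (comps[m]'hm).2 (comps[m]'hm).1) := by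
  intro l
  induction l with
  | nil =>
    intro n _ jA κ v hstate
    exact ⟨jA, κ, v, rfl, rfl, hstate⟩
  | cons sc l ihl =>
    intro n hdrop jA κ v hstate
    have hn : n < comps.length := by
      by_contra hge
      rw [List.drop_eq_nil_of_le (by omega)] at hdrop
      cases hdrop
    rw [List.drop_eq_getElem_cons hn] at hdrop
    obtain ⟨hsc, hl⟩ := List.cons.inj hdrop
    rw [enumA_entry, List.map_cons, List.foldl_cons, List.foldl_cons]
    simp only []
    cases hgt : tripleGt ((payl sc.2 sc.1).1, -(payl sc.2 sc.1).2.1, -(payl sc.2 sc.1).2.2)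
        (v.1, -v.2.1, -v.2.2)
    · rw [if_neg (by simp [hgt]), if_neg (by simp [hgt])]
      exact ihl (n + 1) hl jA κ v hstate
    · rw [if_pos (by simp [hgt]), if_pos (by simp [hgt])]
      exact ihl (n + 1) hl (n : Int) (idxW w sc.1) (payl sc.2 sc.1)
        ⟨n, hn, rfl, by rw [hsc], by rw [hsc]⟩


theorem main_branch (row0 : List Int) (rows : List (List Int)) (h0 : ¬row0 = [])
    (hpre : ∀ row ∈ row0 :: rows, row0.length ≤ row.length) :
    transform (row0 :: rows) = transform_alt (row0 :: rows) := by
  have hW0 : (0 : Int) ≤ (row0.length : Int) := Int.natCast_nonneg _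
  have hH0 : (0 : Int) ≤ ((row0 :: rows).length : Int) := Int.natCast_nonneg _
  have hh : (0 : Int) < ((row0 :: rows).length : Int) := by
    simp only [List.length_cons]
    positivity
  have hw : (0 : Int) < (row0.length : Int) := by
    have := List.length_pos_iff.mpr h0
    omega
  simp only [transform, transform_alt, if_neg h0]
  set g := row0 :: rows with hg
  set H : Int := ((row0 :: rows).length : Int) with hH
  set W : Int := (row0.length : Int) with hWd
  -- the two colour counters agree
  have hcnt : aCounts (row0 :: rows) ((row0 :: rows).length : Int) (row0.length : Int)
      = bCounts (row0 :: rows) (row0.length : Int) := by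
    unfold aCounts bCounts
    have h1 := foldl_range_getD (row0 :: rows) []
      (fun (d : PySem.Dict Int Int) row =>
        (PySem.List.pyRange 0 (row0.length : Int) 1).foldl
          (fun d c => PySem.Dict.modify d (row.getD c.toNat 0) 0 (· + 1)) d)
      (row0 :: rows).length le_rfl PySem.Dict.empty
    rw [List.take_length] at h1
    have h2 : (row0 :: rows).foldl
        (fun (d : PySem.Dict Int Int) row =>
          (PySem.List.pyRange 0 (row0.length : Int) 1).foldl
            (fun d c => PySem.Dict.modify d (row.getD c.toNat 0) 0 (· + 1)) d)
        PySem.Dict.empty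
        = (row0 :: rows).foldl
          (fun (d : PySem.Dict Int Int) row =>
            (row.take ((row0.length : Int)).toNat).foldl
              (fun d v => PySem.Dict.modify d v 0 (· + 1)) d)
          PySem.Dict.empty := by
      refine foldl_congr_mem' (row0 :: rows) _ _ ?_ PySem.Dict.empty
      intro d row hrow
      have hWle : ((row0.length : Int)).toNat ≤ row.length := by
        rw [Int.toNat_natCast]
        exact hpre row hrow
      have h3 := foldl_range_getD row 0
        (fun (d : PySem.Dict Int Int) v => PySem.Dict.modify d v 0 (· + 1))
        ((row0.length : Int)).toNat hWle d
      rw [Int.toNat_of_nonneg hW0] at h3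
      exact h3
    exact h1.trans h2
  rw [hcnt]
  have hposc : ∀ x ∈ (bCounts (row0 :: rows) (row0.length : Int)).items, 0 < x.2 := by
    unfold bCounts
    refine counts_pos _ _ PySem.Dict.empty ?_
    intro x hx
    rw [show (PySem.Dict.empty : PySem.Dict Int Int).items = [] from rfl] at hx
    cases hx
  rcases hcand : (bCounts (row0 :: rows) (row0.length : Int)).items.filter
      (fun p => decide (p.1 ≠ 0)) with _ | ⟨c0, cs⟩
  · rw [hcand, barrier_fold_none _ hcand (none, -1)]
  · rw [hcand, barrier_fold_entry _ hposc c0 cs hcand]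
    dsimp only
    set bar : Int := (cs.foldl (fun best x => if best.2 < x.2 then x else best) c0).1 with hbar
    -- ===== A's scan =====
    have hinv0 : OuterInvA g H W bar []
        (List.replicate H.toNat (List.replicate W.toNat false))
        (List.replicate H.toNat (List.replicate W.toNat (-1 : Int))) [] := by
      refine ⟨dims2_replicate (le_of_lt hh) (le_of_lt hw) _,
        dims2_replicate (le_of_lt hh) (le_of_lt hw) _, ?_, ?_, ?_, ?_, ?_, List.Pairwise.nil⟩
      · intro i sc hsc; cases hsc
      · intro r c _
        rw [vGet_replicate]
        simp
      · intro r c _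
        rw [mGet_replicate]
        simp
      · intro p hp; cases hp
      · intro sc hsc; cases hsc
    obtain ⟨vis', cid', comps', heA, hinvF⟩ :=
      outer_specA g H W bar (cellList H W) []
        (List.replicate H.toNat (List.replicate W.toNat false))
        (List.replicate H.toNat (List.replicate W.toNat (-1 : Int))) [] (by simp) hinv0
    obtain ⟨hdv', hdc', hcomp, hmk, hbound, hcov, hseedpre, hseedinc⟩ := hinvF
    have hA2 : aScan g H W bar = (vis', cid', enumA 0 comps', (comps'.length : Int)) := by
      exact Eq.trans (foldl_nested (stepA g H W bar)
        (PySem.List.pyRange 0 H 1) (PySem.List.pyRange 0 W 1)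
        (List.replicate H.toNat (List.replicate W.toNat false),
         List.replicate H.toNat (List.replicate W.toNat (-1 : Int)),
         enumA 0 [], (([] : List ((Int × Int) × List (Int × Int))).length : Int))) heA
    rw [hA2]
    dsimp only
    -- ===== B's labels =====
    have hN : ((H.toNat * W.toNat : Nat) : Int) = H * W := hw_toNat hh hw
    obtain ⟨hinv0lab, hget0⟩ := initLab_inv (g := g) (barrier := bar) hh hw
    have hlen0 : (initLab g W bar (H * W)).length = H.toNat * W.toNat := hinv0lab.1
    have hfuel : labM (initLab g W bar (H * W)) < H.toNat * W.toNat * (H.toNat * W.toNat) + 1 := by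
      have := labM_le hinv0lab
      rw [hlen0] at this
      omega
    obtain ⟨hinvL, hfixL⟩ := iterL_fix hh hw (H.toNat * W.toNat * (H.toNat * W.toNat) + 1)
      (initLab g W bar (H * W)) hinv0lab hfuel
    set labF := iterL H W (H.toNat * W.toNat * (H.toNat * W.toNat) + 1)
      (initLab g W bar (H * W)) with hlabF
    have hlenF : labF.length = H.toNat * W.toNat := hinvL.1
    -- every ok cell lies in a component
    have hcovmem : ∀ p : Int × Int, OkC g H W bar p → ∃ sc ∈ comps', p ∈ sc.2 := by
      intro p hok
      have h1 : vGet vis' p.1 p.2 = true := by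
        refine hcov p ?_ hok
        simp only [List.nil_append]
        exact mem_cellList.mpr hok.1
      exact (hmk p.1 p.2 hok.1).mp h1
    have hcompP : ∀ (m : Nat) (hm : m < comps'.length),
        OkC g H W bar (comps'[m]'hm).1 ∧ (comps'[m]'hm).2.Nodup ∧
        (∀ p : Int × Int, p ∈ (comps'[m]'hm).2 ↔ ReachC g H W bar (comps'[m]'hm).1 p) ∧
        (∀ r c : Int, InB H W (r, c) →
          (((r, c) : Int × Int) ∈ (comps'[m]'hm).2 ↔ mGet cid' r c = (m : Int))) ∧
        (∀ p ∈ (comps'[m]'hm).2, idxW W (comps'[m]'hm).1 ≤ idxW W p) := by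
      intro m hm
      exact hcomp m (comps'[m]'hm) (List.getElem?_eq_getElem hm)
    have hcellsInB : ∀ (m : Nat) (hm : m < comps'.length), ∀ q ∈ (comps'[m]'hm).2,
        InB H W q := by
      intro m hm q hq
      obtain ⟨hok, _, hmem, _, _⟩ := hcompP m hm
      by_cases hqe : q = (comps'[m]'hm).1
      · rw [hqe]; exact hok.1
      · exact (reachC_ok ((hmem q).mp hq) (fun he => hqe he.symm)).1
    have hseedself : ∀ (m : Nat) (hm : m < comps'.length),
        (comps'[m]'hm).1 ∈ (comps'[m]'hm).2 := by
      intro m hm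
      exact ((hcompP m hm).2.2.1 _).mpr Relation.ReflTransGen.refl
    have hlabseed : ∀ (m : Nat) (hm : m < comps'.length), ∀ q ∈ (comps'[m]'hm).2,
        labGet labF (idxW W q) = idxW W (comps'[m]'hm).1 := by
      intro m hm
      obtain ⟨hok, _, hmem, _, hmin⟩ := hcompP m hm
      exact lab_eq_seed hinvL hh hw hfixL hok hmem hmin
    have huniq : ∀ (m1 m2 : Nat) (hm1 : m1 < comps'.length) (hm2 : m2 < comps'.length),
        idxW W (comps'[m1]'hm1).1 = idxW W (comps'[m2]'hm2).1 → m1 = m2 := by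
      intro m1 m2 hm1 hm2 he
      have hpw := (List.pairwise_iff_getElem).mp hseedinc
      rcases lt_trichotomy m1 m2 with hlt | heq | hgt
      · have := hpw m1 m2 hm1 hm2 hlt
        omega
      · exact heq
      · have := hpw m2 m1 hm2 hm1 hgt
        omega
    have hlab_of_cell : ∀ j : Int, 0 ≤ j → j < H * W → 0 ≤ labGet labF j →
        ∃ (m : Nat) (hm : m < comps'.length), pOfW W j ∈ (comps'[m]'hm).2 ∧
          labGet labF j = idxW W (comps'[m]'hm).1 := by
      intro j h0j hjlt hnn
      have hok := labGet_nonneg_ok hinvL hh hw h0j hjlt hnn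
      obtain ⟨sc, hscm, hpm⟩ := hcovmem _ hok
      obtain ⟨m, hm, rfl⟩ := List.getElem_of_mem hscm
      refine ⟨m, hm, hpm, ?_⟩
      have := hlabseed m hm _ hpm
      rw [show idxW W (pOfW W j) = j from (cell_of_idx hw h0j hjlt).2] at this
      exact this
    have hlabneg : ∀ j : Int, 0 ≤ j → j < H * W →
        ¬ OkC g H W bar (pOfW W j) → labGet labF j = -1 := by
      intro j h0j hjlt hok
      have hjn : j.toNat < labF.length := by rw [hlenF]; omega
      have hje : ((j.toNat : Nat) : Int) = j := Int.toNat_of_nonneg h0j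
      have := (hinvL.2 j.toNat hjn).1 (by rwa [hje])
      unfold labGet
      rw [List.getD_eq_getElem _ _ hjn]
      exact this
    -- the empty test agrees with A's empty comps list
    have hallb : labF.all (fun x => decide (x < 0)) = true ↔ comps' = [] := by
      constructor
      · intro hall
        match hcs : comps' with
        | [] => rfl
        | sc :: l =>
          exfalso
          have hm0 : 0 < comps'.length := by rw [hcs]; simp
          obtain ⟨hok, _, _, _, _⟩ := hcompP 0 hm0
          have hself := hseedself 0 hm0
          have hval := hlabseed 0 hm0 _ hself
          obtain ⟨hb0, hblt⟩ := idxW_bounds hok.1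
          have hn : (idxW W (comps'[0]'hm0).1).toNat < labF.length := by
            rw [hlenF]; omega
          have hmem : labF[(idxW W (comps'[0]'hm0).1).toNat] ∈ labF :=
            List.getElem_mem hn
          have := List.all_eq_true.mp hall _ hmem
          rw [show labF[(idxW W (comps'[0]'hm0).1).toNat]
              = labGet labF (idxW W (comps'[0]'hm0).1) from by
            unfold labGet; rw [List.getD_eq_getElem _ _ hn]] at this
          rw [hval] at this
          simp only [decide_eq_true_eq] at this
          omega
      · intro hcs
        rw [List.all_eq_true]
        intro x hx
        obtain ⟨i, hi, rfl⟩ := List.getElem_of_mem hx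
        simp only [decide_eq_true_eq]
        have h0i : (0 : Int) ≤ (i : Int) := by positivity
        have hilt : (i : Int) < H * W := by rw [hlenF] at hi; omega
        have hnok : ¬ OkC g H W bar (pOfW W (i : Int)) := by
          intro hok
          obtain ⟨sc, hscm, _⟩ := hcovmem _ hok
          rw [hcs] at hscm
          cases hscm
        have := hlabneg (i : Int) h0i hilt hnok
        rw [show labGet labF (i : Int) = labF[i] from by
          unfold labGet; rw [Int.toNat_natCast, List.getD_eq_getElem _ _ hi]] at this
        omega
    match hcs : comps' with
    | [] =>
      have hBall : labF.all (fun x => decide (x < 0)) = true := hallb.mpr hcs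
      rw [show enumA 0 ([] : List ((Int × Int) × List (Int × Int))) = [] from rfl]
      rw [if_pos hBall]
    | sc0 :: rest =>
      have hBall : ¬ labF.all (fun x => decide (x < 0)) = true := by
        rw [hallb, hcs]
        simp
      rw [enumA_entry, if_neg hBall]
      dsimp only
      -- labels are bounded by their index
      have hlable : ∀ j : Int, 0 ≤ j → j < H * W → labGet labF j ≤ j := by
        intro j h0j hjlt
        have hjn : j.toNat < labF.length := by rw [hlenF]; omega
        have hje : ((j.toNat : Nat) : Int) = j := Int.toNat_of_nonneg h0j
        have hge : labGet labF j = labF[j.toNat]'hjn := by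
          unfold labGet
          rw [List.getD_eq_getElem _ _ hjn]
        rcases Classical.em (OkC g H W bar (pOfW W j)) with hok | hok
        · obtain ⟨q, _, _, _, hle⟩ := (hinvL.2 j.toNat hjn).2 (by rwa [hje])
          rw [hje] at hle
          omega
        · have := (hinvL.2 j.toNat hjn).1 (by rwa [hje])
          omega
      -- each component's aggregate equals its stored payload
      have hentry : ∀ (m : Nat) (hm : m < comps'.length),
          (aggOf W (flatOf labF (idxW W (comps'[m]'hm).1) (H * W))).getD (0, 0, 0)
            = payl (comps'[m]'hm).2 (comps'[m]'hm).1 := by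
        intro m hm
        have hokm := (hcompP m hm).1
        have hndm := (hcompP m hm).2.1
        have hflatmem : ∀ j : Int, j ∈ flatOf labF (idxW W (comps'[m]'hm).1) (H * W) ↔
            ∃ q ∈ (comps'[m]'hm).2, j = idxW W q := by
          intro j
          rw [mem_flatOf]
          constructor
          · rintro ⟨h1, h2, h3⟩
            have hnn : 0 ≤ labGet labF j := by
              rw [h3]
              exact (idxW_bounds hokm.1).1
            obtain ⟨mi, hmi, hpm, hval⟩ := hlab_of_cell j h1 h2 hnn
            have hmieq : mi = m := huniq mi m hmi hm (by rw [← hval, h3])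
            subst hmieq
            exact ⟨pOfW W j, hpm, ((cell_of_idx hw h1 h2).2).symm⟩
          · rintro ⟨q, hq, rfl⟩
            have hqin := hcellsInB m hm q hq
            obtain ⟨hb1, hb2⟩ := idxW_bounds hqin
            exact ⟨hb1, hb2, hlabseed m hm q hq⟩
        have hseedflat : idxW W (comps'[m]'hm).1 ∈
            flatOf labF (idxW W (comps'[m]'hm).1) (H * W) :=
          (hflatmem _).mpr ⟨(comps'[m]'hm).1, hseedself m hm, rfl⟩
        match hfl : flatOf labF (idxW W (comps'[m]'hm).1) (H * W) with
        | [] =>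
          rw [hfl] at hseedflat
          cases hseedflat
        | j0 :: t =>
          rw [aggOf_cons, Option.getD_some]
          rw [hfl] at hflatmem hseedflat
          have hndflat : (j0 :: t).Nodup := by
            rw [← hfl]
            exact List.Nodup.filter _ (PySem.List.nodup_pyRange_one 0 (H * W))
          have hndmap : ((comps'[m]'hm).2.map (idxW W)).Nodup := by
            refine List.Nodup.map_on ?_ hndm
            intro x hx y hy he
            exact idxW_inj (hcellsInB m hm x hx) (hcellsInB m hm y hy) he
          have hmemiff : ∀ j : Int, j ∈ j0 :: t ↔ j ∈ (comps'[m]'hm).2.map (idxW W) := by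
            intro j
            rw [hflatmem j, List.mem_map]
            constructor
            · rintro ⟨q, hq, rfl⟩; exact ⟨q, hq, rfl⟩
            · rintro ⟨q, hq, rfl⟩; exact ⟨q, hq, rfl⟩
          have hperm : (j0 :: t).Perm ((comps'[m]'hm).2.map (idxW W)) :=
            (List.perm_ext_iff_of_nodup hndflat hndmap).mpr hmemiff
          have hlen : (j0 :: t).length = (comps'[m]'hm).2.length := by
            rw [hperm.length_eq, List.length_map]
          have hrowset : ∀ x : Int, x ∈ (comps'[m]'hm).1.1 ::
              (comps'[m]'hm).2.map Prod.fst ↔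
              x ∈ PySem.Int.floordiv j0 W :: t.map (fun j => PySem.Int.floordiv j W) := by
            intro x
            have hx1 : (PySem.Int.floordiv j0 W :: t.map (fun j => PySem.Int.floordiv j W))
                = (j0 :: t).map (fun j => PySem.Int.floordiv j W) := rfl
            rw [hx1, List.mem_cons, List.mem_map, List.mem_map]
            constructor
            · rintro (rfl | ⟨q, hq, rfl⟩)
              · exact ⟨idxW W (comps'[m]'hm).1, hseedflat, (floordiv_idxW hokm.1).1⟩
              · exact ⟨idxW W q, (hflatmem _).mpr ⟨q, hq, rfl⟩,
                  (floordiv_idxW (hcellsInB m hm q hq)).1⟩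
            · rintro ⟨j, hj, rfl⟩
              obtain ⟨q, hq, rfl⟩ := (hflatmem j).mp hj
              exact Or.inr ⟨q, hq, (floordiv_idxW (hcellsInB m hm q hq)).1.symm⟩
          have hcolset : ∀ x : Int, x ∈ (comps'[m]'hm).1.2 ::
              (comps'[m]'hm).2.map Prod.snd ↔
              x ∈ PySem.Int.mod j0 W :: t.map (fun j => PySem.Int.mod j W) := by
            intro x
            have hx1 : (PySem.Int.mod j0 W :: t.map (fun j => PySem.Int.mod j W))
                = (j0 :: t).map (fun j => PySem.Int.mod j W) := rfl
            rw [hx1, List.mem_cons, List.mem_map, List.mem_map]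
            constructor
            · rintro (rfl | ⟨q, hq, rfl⟩)
              · exact ⟨idxW W (comps'[m]'hm).1, hseedflat, (floordiv_idxW hokm.1).2⟩
              · exact ⟨idxW W q, (hflatmem _).mpr ⟨q, hq, rfl⟩,
                  (floordiv_idxW (hcellsInB m hm q hq)).2⟩
            · rintro ⟨j, hj, rfl⟩
              obtain ⟨q, hq, rfl⟩ := (hflatmem j).mp hj
              exact Or.inr ⟨q, hq, (floordiv_idxW (hcellsInB m hm q hq)).2.symm⟩
          have eA1 : (comps'[m]'hm).2.foldl (fun mm p => if p.1 < mm then p.1 else mm)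
              (comps'[m]'hm).1.1 = minA ((comps'[m]'hm).2.map Prod.fst)
              (comps'[m]'hm).1.1 := by
            rw [minA, List.foldl_map]
          have eA2 : (comps'[m]'hm).2.foldl (fun mm p => if p.2 < mm then p.2 else mm)
              (comps'[m]'hm).1.2 = minA ((comps'[m]'hm).2.map Prod.snd)
              (comps'[m]'hm).1.2 := by
            rw [minA, List.foldl_map]
          have e2 : minB (t.map (fun j => PySem.Int.floordiv j W)) (PySem.Int.floordiv j0 W)
              = (comps'[m]'hm).2.foldl (fun mm p => if p.1 < mm then p.1 else mm)
                (comps'[m]'hm).1.1 := by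
            rw [eA1]
            exact (minA_eq_minB _ _ _ _ hrowset).symm
          have e3 : minB (t.map (fun j => PySem.Int.mod j W)) (PySem.Int.mod j0 W)
              = (comps'[m]'hm).2.foldl (fun mm p => if p.2 < mm then p.2 else mm)
                (comps'[m]'hm).1.2 := by
            rw [eA2]
            exact (minA_eq_minB _ _ _ _ hcolset).symm
          show (((j0 :: t).length : Int), _, _) = _
          rw [e2, e3, hlen]
          rfl
      -- the stats dict lists exactly the components, keyed by their seeds
      have hstats : (bStats H W labF).items
          = comps'.map (fun sc => (idxW W sc.1, payl sc.2 sc.1)) := by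
        rw [bStats_eq_fold]
        have hagg := agg_spec H W labF comps'
          (fun j h1 h2 h3 => by
            obtain ⟨m, hm, hpm, hval⟩ := hlab_of_cell j h1 h2 h3
            exact ⟨comps'[m]'hm, List.getElem_mem hm, hval⟩)
          (fun sc hsc => by
            obtain ⟨m, hm, rfl⟩ := List.getElem_of_mem hsc
            refine ⟨hlabseed m hm _ (hseedself m hm), idxW_bounds (hcompP m hm).1.1⟩)
          hseedinc hlable (H.toNat * W.toNat) (le_of_eq hN)
        rw [hN] at hagg
        rw [hagg]
        have hfil : comps'.filter (fun sc => decide (idxW W sc.1 < H * W)) = comps' := by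
          rw [List.filter_eq_self]
          intro sc hsc
          obtain ⟨m, hm, rfl⟩ := List.getElem_of_mem hsc
          simp only [decide_eq_true_eq]
          exact (idxW_bounds (hcompP m hm).1.1).2
        rw [hfil]
        apply List.map_congr_left
        intro sc hsc
        obtain ⟨m, hm, rfl⟩ := List.getElem_of_mem hsc
        rw [hentry m hm]
      -- the selection folds agree
      have hm0 : 0 < comps'.length := by rw [hcs]; simp
      have hc0 : comps'[0]'hm0 = sc0 := by
        simp [hcs]
      have hdrop1 : comps'.drop 1 = rest := by rw [hcs]; rfl
      obtain ⟨jA', κ', v', hfA, hfB, m', hm', hjA', hκ', hv'⟩ :=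
        best_pair W comps' rest 1 hdrop1 0 (idxW W sc0.1) (payl sc0.2 sc0.1)
          ⟨0, hm0, rfl, by rw [hc0], by rw [hc0]⟩
      have hk0 : (((0 : Nat) : Int), payl sc0.2 sc0.1) = ((0 : Int), (payl sc0.2 sc0.1).1,
          (payl sc0.2 sc0.1).2.1, (payl sc0.2 sc0.1).2.2) := rfl
      rw [hcs] at hstats
      have hbb : bBest (bStats H W labF)
          = ((rest.map (fun sc => (idxW W sc.1, payl sc.2 sc.1))).foldl
              (fun (best : Option Int × Option (Int × Int × Int)) p =>
                let key := (p.2.1, -p.2.2.1, -p.2.2.2)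
                match best.2 with
                | none => (some p.1, some key)
                | some bk => if tripleGt key bk then (some p.1, some key) else best)
              (some (idxW W sc0.1), some ((payl sc0.2 sc0.1).1, -(payl sc0.2 sc0.1).2.1,
                -(payl sc0.2 sc0.1).2.2))) := by
        unfold bBest
        rw [hstats, List.map_cons, List.foldl_cons]
      rw [hk0, hfA, hbb, hfB]
      dsimp only
      -- cell-by-cell agreement of the outputs
      apply List.map_congr_left
      intro r hr
      apply List.map_congr_left
      intro c hc
      rw [PySem.List.mem_pyRange_one] at hr hc
      have hin : InB H W (r, c) := ⟨hr.1, hr.2, hc.1, hc.2⟩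
      by_cases hbarc : cellAt g r c = bar
      · rw [if_pos hbarc, if_pos hbarc]
      · rw [if_neg hbarc, if_neg hbarc]
        have hok : OkC g H W bar (r, c) := ⟨hin, hbarc⟩
        obtain ⟨sc, hscm, hpmem⟩ := hcovmem (r, c) hok
        obtain ⟨mi, hmi, rfl⟩ := List.getElem_of_mem hscm
        have hmg : mGet cid' r c = (mi : Int) :=
          ((hcompP mi hmi).2.2.2.1 r c hin).mp hpmem
        have hlabv : labGet labF (r * W + c) = idxW W (comps'[mi]'hmi).1 :=
          hlabseed mi hmi _ hpmem
        by_cases hmm : mi = m'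
        · subst hmm
          rw [if_pos (by rw [hmg, hjA']), if_pos (by rw [hlabv, hκ'])]
        · rw [if_neg (by
            rw [hmg, hjA']
            intro hcon
            exact hmm (by exact_mod_cast hcon)),
            if_neg (by
            rw [hlabv, hκ']
            intro hcon
            exact hmm (huniq mi m' hmi hm' (Option.some.inj hcon)))]

-- ===== VERDICT (by name: the statement is the Claim_ definition above) =====
theorem transform_spec : Claim_equal_transform := by
  intro grid _ hpre
  unfold Spec_transform
  cases grid with
  | nil => rfl
  | cons row0 rows =>
    by_cases h0 : row0 = []
    · simp only [transform, transform_alt, if_pos h0]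
    · exact main_branch row0 rows h0 (fun row hrow => hpre row hrow)
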